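-- pv_equiv track=rewrite | github.com/xiaohaomao/timgroup_disease_diagnosis | codes/core/core/utils/utils.py | get_shortest_path_to_root
-- ===== SOURCE A (Python) =====
-- import heapq
-- from queue import Queue
--
-- def slice_dict_with_keep_set(old_dict, keep_key_set=None):
-- 	return old_dict if keep_key_set == None else {key:old_dict[key] for key in keep_key_set if key in old_dict}
--
-- def get_reverse_key(key):
-- 	return 'IS_A' if key == 'CHILD' else 'CHILD'
--
-- def get_shortest_path_to_root(code, root, info_dict):
-- 	"""
-- 	Returns:
-- 		list: [root_code, mid_code1, mid_code2, ..., code]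
-- 	"""
-- 	ret_dict = wide_search_from_to_base_with_all_path(code, root, 'IS_A', info_dict)
-- 	path_list = []
-- 	p_code = root
-- 	while p_code != code:
-- 		path_list.append(p_code)
-- 		p_code = ret_dict[p_code][0][1]
-- 	path_list.append(code)
-- 	return path_list
--
-- def wide_search_from_to_base_with_all_path(from_code, to_code, key, info_dict):
-- 	"""
-- 	Returns:
-- 		dict: {code: heapq([(distant, from_code), ...]) }; distant=shortest distant between hpo_code and code if comes from from_code;
-- 	"""
-- 	ret_dict = wide_search_base_with_all_path(from_code, key, info_dict)
-- 	if to_code not in ret_dict: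
-- 		return {}
-- 	r_key = get_reverse_key(key)
-- 	path_code_set = {to_code}
-- 	q = Queue()
-- 	q.put(to_code)
-- 	while not q.empty():
-- 		ex_code = q.get()
-- 		for p_code in info_dict[ex_code].get(r_key, []):
-- 			if p_code in ret_dict and p_code not in path_code_set:
-- 				q.put(p_code)
-- 				path_code_set.add(p_code)
-- 	return slice_dict_with_keep_set(ret_dict, path_code_set)
--
-- def wide_search_base_with_all_path(code, key, info_dict):
-- 	"""
-- 	Args:
-- 		code (str)
-- 		key (str): 'IS_A' or 'CHILD'
-- 		info_dict (dict): {code: {'IS_A': [], 'CHILD': []}, ...}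
-- 	Returns:
-- 		dict: {code: heapq([(distant, from_code), ...]) }; distant=shortest distant between hpo_code and code if comes from from_code;
-- 	"""
-- 	ret_dict = {code: []}
-- 	once_in_queue = set()
-- 	q = Queue()
-- 	q.put((code, 0))
-- 	while not q.empty():
-- 		ex_code, dis = q.get()
-- 		p_dis = dis + 1
-- 		for p_code in info_dict[ex_code].get(key, []):
-- 			if p_code not in ret_dict:
-- 				ret_dict[p_code] = []
-- 			heapq.heappush(ret_dict[p_code], (p_dis, ex_code))
-- 			if p_code in once_in_queue:
-- 				continue
-- 			q.put((p_code, p_dis))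
-- 			once_in_queue.add(p_code)
-- 	return ret_dict
-- ===== SOURCE B (Python) =====
-- from queue import Queue
--
-- def get_shortest_path_to_root(code, root, info_dict):
-- 	"""Single forward BFS keeping, per node, only the minimum (distance, from_code)
-- 	pair instead of a heap of all paths; no reverse pruning pass."""
-- 	dist = {code: 0}
-- 	best = {}
-- 	q = Queue()
-- 	q.put((code, 0))
-- 	while not q.empty():
-- 		x, d = q.get()
-- 		d1 = d + 1
-- 		for p in info_dict[x].get('IS_A', []):
-- 			if p not in dist:
-- 				dist[p] = d1
-- 				best[p] = x
-- 				q.put((p, d1))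
-- 			elif p in best and (d1, x) < (dist[p], best[p]):
-- 				best[p] = x
-- 	path_list = []
-- 	p_code = root
-- 	while p_code != code:
-- 		path_list.append(p_code)
-- 		p_code = best[p_code]
-- 	path_list.append(code)
-- 	return path_list
-- ===== Notes on version B (the rewrite author's own statement) =====
-- stated objective: simpler
-- what changed: A runs a BFS that pushes every (distance, predecessor) pair into a per-node binary heap and then prunes with a second reverse BFS over CHILD edges plus a dict-slicing pass; B runs one forward BFS keeping only the minimum (distance, predecessor) pair per node and reconstructs the path directly, dropping the heaps, the reverse pass and the slice.
import Mathlib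
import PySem

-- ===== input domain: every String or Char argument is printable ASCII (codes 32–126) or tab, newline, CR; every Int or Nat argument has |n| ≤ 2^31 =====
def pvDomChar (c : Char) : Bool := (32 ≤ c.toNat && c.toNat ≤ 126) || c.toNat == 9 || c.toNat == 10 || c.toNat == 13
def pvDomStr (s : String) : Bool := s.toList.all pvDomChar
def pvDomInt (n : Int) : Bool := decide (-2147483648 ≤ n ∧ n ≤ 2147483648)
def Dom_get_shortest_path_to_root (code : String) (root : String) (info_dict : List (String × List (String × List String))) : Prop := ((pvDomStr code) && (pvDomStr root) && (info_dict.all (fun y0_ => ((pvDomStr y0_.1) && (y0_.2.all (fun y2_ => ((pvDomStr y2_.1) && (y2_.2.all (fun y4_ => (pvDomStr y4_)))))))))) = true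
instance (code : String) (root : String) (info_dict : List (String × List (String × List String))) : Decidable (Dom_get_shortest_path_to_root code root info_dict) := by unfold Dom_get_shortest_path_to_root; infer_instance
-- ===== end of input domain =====

-- B replaces A's heap-of-all-paths BFS plus reverse-BFS pruning pass by a single
-- forward BFS keeping only the minimum (distance, predecessor) pair per node.

abbrev pvInfo := List (String × List (String × List String))

-- Python tuple comparison  (int, str) < (int, str)
def pvLt (x y : Int × String) : Bool :=
  decide (x.1 < y.1) || (x.1 == y.1 && decide (x.2 < y.2))

-- ===== PORT A =====
-- heapq._siftdown / heapq.heappush, transliterated (binary heap in a list, sift-up;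
-- the getD default is never read: parentpos < pos < heap.length)
def pvSiftdown (heap : List (Int × String)) (pos : Nat) (newitem : Int × String) : List (Int × String) :=
  if 0 < pos then
    let parentpos := (pos - 1) / 2
    let parent := heap.getD parentpos (0, "")
    if pvLt newitem parent then pvSiftdown (heap.set pos parent) parentpos newitem
    else heap.set pos newitem
  else heap.set pos newitem
termination_by pos
decreasing_by omega

def pvHeappush (heap : List (Int × String)) (item : Int × String) : List (Int × String) :=
  pvSiftdown (heap ++ [item]) heap.length item

-- info_dict[x].get(key, []) (the outer lookup raises KeyError when x is missing: those
-- inputs are outside Pre_; the port reads [] there)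
def pvInfoGetA (info : pvInfo) (x key : String) : List String :=
  PySem.Dict.getD (PySem.Dict.mk (((PySem.Dict.mk info).get? x).getD [])) key []

def pvGetReverseKey (key : String) : String := if key == "CHILD" then "IS_A" else "CHILD"

-- fuel for the while-loops (a totality device only: every queue insertion marks a fresh
-- member of the flatMap list below, so the loop always stops well inside this bound)
def pvFuelA (info : pvInfo) (key : String) : Nat :=
  2 + 2 * (info.flatMap (fun kv => PySem.Dict.getD (PySem.Dict.mk kv.2) key [])).length

-- the while-loop of wide_search_base_with_all_path
def pvABfs (info : pvInfo) (key : String) :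
    Nat → List (String × Int) → PySem.Dict String (List (Int × String)) → PySem.Set String →
    PySem.Dict String (List (Int × String))
  | 0, _, ret, _ => ret
  | _ + 1, [], ret, _ => ret
  | f + 1, (ex, dis) :: qs, ret, once =>
    let pdis := dis + 1
    let s := (pvInfoGetA info ex key).foldl
      (fun (s : List (String × Int) × PySem.Dict String (List (Int × String)) × PySem.Set String) p =>
        let ret1 := if s.2.1.contains p then s.2.1 else s.2.1.insert p []
        let ret2 := ret1.modify p [] (fun h => pvHeappush h (pdis, ex))
        if PySem.Set.contains s.2.2 p then (s.1, ret2, s.2.2)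
        else (s.1 ++ [(p, pdis)], ret2, PySem.Set.add s.2.2 p))
      (qs, ret, once)
    pvABfs info key f s.1 s.2.1 s.2.2

def pvWideSearchBase (code key : String) (info : pvInfo) : PySem.Dict String (List (Int × String)) :=
  pvABfs info key (pvFuelA info key) [(code, 0)] (PySem.Dict.mk [(code, [])]) PySem.Set.empty

-- the reverse-BFS pruning loop of wide_search_from_to_base_with_all_path
def pvRevBfs (info : pvInfo) (rkey : String) (ret : PySem.Dict String (List (Int × String))) :
    Nat → List String → PySem.Set String → PySem.Set String
  | 0, _, ps => ps
  | _ + 1, [], ps => ps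
  | f + 1, ex :: qs, ps =>
    let s := (pvInfoGetA info ex rkey).foldl
      (fun (s : List String × PySem.Set String) p =>
        if ret.contains p && !(PySem.Set.contains s.2 p) then (s.1 ++ [p], PySem.Set.add s.2 p)
        else s)
      (qs, ps)
    pvRevBfs info rkey ret f s.1 s.2

-- slice_dict_with_keep_set (the comprehension iterates the keep set; the produced dict is
-- only ever looked up afterwards, so the set's iteration order cannot be observed)
def pvSliceDict (old : PySem.Dict String (List (Int × String))) (keep : Option (PySem.Set String)) :
    PySem.Dict String (List (Int × String)) :=
  match keep with
  | none => old
  | some s => s.foldl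
      (fun d k => match old.get? k with | some v => d.insert k v | none => d)
      (PySem.Dict.mk [])

def pvWideFromTo (from_code to_code key : String) (info : pvInfo) :
    PySem.Dict String (List (Int × String)) :=
  let ret := pvWideSearchBase from_code key info
  if !(ret.contains to_code) then PySem.Dict.mk []
  else
    let rkey := pvGetReverseKey key
    pvSliceDict ret (some (pvRevBfs info rkey ret (pvFuelA info rkey) [to_code]
      (PySem.Set.add PySem.Set.empty to_code)))

-- the path-reconstruction while-loop (ret_dict[p][0][1]; junk defaults are reached only
-- outside Pre_)
def pvAPath (code : String) (ret : PySem.Dict String (List (Int × String))) :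
    Nat → String → List String → List String
  | 0, _, acc => acc
  | f + 1, p, acc =>
    if p == code then acc ++ [code]
    else pvAPath code ret f (((ret.getD p []).getD 0 (0, "")).2) (acc ++ [p])

def get_shortest_path_to_root (code : String) (root : String) (info_dict : pvInfo) : List String :=
  let ret := pvWideFromTo code root "IS_A" info_dict
  pvAPath code ret (info_dict.length + 2) root []

-- ===== PORT B =====
def pvIsaB (info : pvInfo) (x : String) : List String :=
  PySem.Dict.getD (PySem.Dict.mk (((PySem.Dict.mk info).get? x).getD [])) "IS_A" []

def pvFuelB (info : pvInfo) : Nat :=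
  2 + 2 * (info.flatMap (fun kv => PySem.Dict.getD (PySem.Dict.mk kv.2) "IS_A" [])).length

-- single forward BFS: dist = shortest distance, best = minimal (dist,pred) predecessor
def pvBBfs (info : pvInfo) :
    Nat → List (String × Int) → PySem.Dict String Int → PySem.Dict String String →
    PySem.Dict String Int × PySem.Dict String String
  | 0, _, dist, best => (dist, best)
  | _ + 1, [], dist, best => (dist, best)
  | f + 1, (x, d) :: qs, dist, best =>
    let d1 := d + 1
    let s := (pvIsaB info x).foldl
      (fun (s : List (String × Int) × PySem.Dict String Int × PySem.Dict String String) p =>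
        if !(s.2.1.contains p) then (s.1 ++ [(p, d1)], s.2.1.insert p d1, s.2.2.insert p x)
        else if s.2.2.contains p && pvLt (d1, x) (s.2.1.getD p 0, s.2.2.getD p "") then
          (s.1, s.2.1, s.2.2.insert p x)
        else s)
      (qs, dist, best)
    pvBBfs info f s.1 s.2.1 s.2.2

def pvBPath (code : String) (best : PySem.Dict String String) :
    Nat → String → List String → List String
  | 0, _, acc => acc
  | f + 1, p, acc =>
    if p == code then acc ++ [code]
    else pvBPath code best f (best.getD p "") (acc ++ [p])

def get_shortest_path_to_root_alt (code : String) (root : String) (info_dict : pvInfo) : List String :=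
  let s := pvBBfs info_dict (pvFuelB info_dict) [(code, 0)] (PySem.Dict.mk [(code, 0)]) (PySem.Dict.mk [])
  pvBPath code s.2 (info_dict.length + 2) root []

-- ===== PRECONDITION & SPEC =====
-- the set of nodes reachable from code along IS_A edges: iterated closure (saturates
-- because each non-fixed expansion adds a fresh member of the IS_A universe)
def pvExpand (info : pvInfo) (s : PySem.Set String) : PySem.Set String :=
  s.foldl (fun t x => PySem.Set.update t (pvIsaB info x)) s

def pvReachAux (info : pvInfo) : Nat → PySem.Set String → PySem.Set String
  | 0, s => s
  | n + 1, s => pvReachAux info n (pvExpand info s)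

def pvReach (info : pvInfo) (code : String) : PySem.Set String :=
  pvReachAux info
    ((info.flatMap (fun kv => PySem.Dict.getD (PySem.Dict.mk kv.2) "IS_A" [])).length + 1)
    (PySem.Set.add PySem.Set.empty code)

-- Pre_ excludes inputs where A raises KeyError: a node reachable from code missing from
-- info_dict, or root unreachable from code, or (unless the path is trivial) CHILD lists that
-- do not list back a reachable IS_A edge, on which A's pruning walk raises mid-reconstruction;
-- on the rare CHILD-inconsistent inputs where that walk happens not to raise, A returns
-- exactly the path B returns (see claim.json cites).
def Pre_get_shortest_path_to_root (code : String) (root : String) (info_dict : List (String × List (String × List String))) : Prop :=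
  (∀ x ∈ pvReach info_dict code, (PySem.Dict.mk info_dict).contains x = true)
  ∧ root ∈ pvReach info_dict code
  ∧ (root = code ∨ root ∈ pvIsaB info_dict code ∨
      ∀ x ∈ pvReach info_dict code, ∀ y ∈ pvIsaB info_dict x, x ∈ pvInfoGetA info_dict y "CHILD")

instance (code : String) (root : String) (info_dict : List (String × List (String × List String))) : Decidable (Pre_get_shortest_path_to_root code root info_dict) := by
  unfold Pre_get_shortest_path_to_root; infer_instance

def pvWitness_get_shortest_path_to_root : String × String × (List (String × List (String × List String))) :=
  ("a", "c", [("a", [("IS_A", ["b"])]), ("b", [("IS_A", ["c"]), ("CHILD", ["a"])]), ("c", [("CHILD", ["b"])])])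

def Spec_get_shortest_path_to_root (code : String) (root : String) (info_dict : List (String × List (String × List String))) (out : List String) : Prop := out = get_shortest_path_to_root_alt code root info_dict
instance (code : String) (root : String) (info_dict : List (String × List (String × List String))) (out : List String) : Decidable (Spec_get_shortest_path_to_root code root info_dict out) := by unfold Spec_get_shortest_path_to_root; infer_instance

-- ===== CLAIM (what is proved, stated in full; the proofs are below) =====
def Claim_equal_get_shortest_path_to_root : Prop := ∀ (code : String) (root : String) (info_dict : List (String × List (String × List String))), Dom_get_shortest_path_to_root code root info_dict → Pre_get_shortest_path_to_root code root info_dict → Spec_get_shortest_path_to_root code root info_dict (get_shortest_path_to_root code root info_dict)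
-- ===== LEMMAS AND PROOFS =====
lemma pvLt_iff (x y : Int × String) : pvLt x y = true ↔ (x.1 < y.1 ∨ (x.1 = y.1 ∧ x.2 < y.2)) := by
  simp [pvLt, Bool.or_eq_true, Bool.and_eq_true, decide_eq_true_eq, beq_iff_eq]

lemma pvLt_eq_false (x y : Int × String) :
    pvLt x y = false ↔ (¬ x.1 < y.1 ∧ (x.1 = y.1 → ¬ x.2 < y.2)) := by
  rw [← Bool.not_eq_true, pvLt_iff]; tauto

lemma pvLt_irrefl (x : Int × String) : pvLt x x = false := by
  rw [pvLt_eq_false]; exact ⟨lt_irrefl _, fun _ => lt_irrefl _⟩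

lemma pvLe_trans {a b c : Int × String} (h1 : pvLt b a = false) (h2 : pvLt c b = false) :
    pvLt c a = false := by
  rw [pvLt_eq_false] at *
  obtain ⟨h1a, h1b⟩ := h1; obtain ⟨h2a, h2b⟩ := h2
  constructor
  · intro h; omega
  · intro hca h
    have hab : b.1 = a.1 := by omega
    have hcb : c.1 = b.1 := by omega
    have hs1 : a.2 ≤ b.2 := not_lt.mp (h1b hab)
    have hs2 : b.2 ≤ c.2 := not_lt.mp (h2b hcb)
    exact absurd h (not_lt.mpr (hs1.trans hs2))

lemma pvLt_lt_of_lt_of_le {a b c : Int × String} (hab : pvLt a b = true) (hbc : pvLt c b = false) :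
    pvLt a c = true := by
  rw [pvLt_iff] at *; rw [pvLt_eq_false] at hbc
  obtain ⟨h1, h2⟩ := hbc
  rcases hab with h | ⟨h, h'⟩
  · left; omega
  · rcases lt_trichotomy b.1 c.1 with g | g | g
    · left; omega
    · right; exact ⟨h.trans g, lt_of_lt_of_le h' (not_lt.mp (h2 g.symm))⟩
    · exact absurd g h1

lemma pv_getD_mem {l : List (Int × String)} {i : Nat} {j : Int × String} (h : i < l.length) :
    l.getD i j ∈ l := by
  rw [List.getD_eq_getElem l j h]; exact List.getElem_mem h

lemma pv_getD_set_eq {l : List (Int × String)} {p : Nat} {v j : Int × String} (h : p < l.length) :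
    (l.set p v).getD p j = v := by
  simp [List.getD, h]

lemma pv_getD_set_ne {l : List (Int × String)} {p i : Nat} {v j : Int × String} (h : i ≠ p) :
    (l.set p v).getD i j = l.getD i j := by
  simp [List.getD, List.getElem?_set_ne (by omega : p ≠ i)]

def PvHeap (l : List (Int × String)) : Prop :=
  ∀ i : Nat, 0 < i → i < l.length →
    pvLt (l.getD i (0, "")) (l.getD ((i - 1) / 2) (0, "")) = false

lemma pvSiftdown_length {pos : Nat} {h : List (Int × String)} {it : Int × String} :
    (pvSiftdown h pos it).length = h.length := by
  fun_induction pvSiftdown h pos it <;> simp_all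

lemma pvSiftdown_mem {pos : Nat} {h : List (Int × String)} {it x : Int × String}
    (hp : pos < h.length) (hx : x ∈ pvSiftdown h pos it) : x ∈ h ∨ x = it := by
  fun_induction pvSiftdown h pos it with
  | case1 h pos hpos pp par hlt ih =>
    rcases ih (by simp; omega) hx with h1 | h1
    · rcases List.mem_or_eq_of_mem_set h1 with h2 | h2
      · exact Or.inl h2
      · subst h2; exact Or.inl (pv_getD_mem (by omega))
    · exact Or.inr h1
  | case2 h pos hpos pp par hlt =>
    rcases List.mem_or_eq_of_mem_set hx with h2 | h2
    · exact Or.inl h2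
    · exact Or.inr h2
  | case3 h pos hpos =>
    rcases List.mem_or_eq_of_mem_set hx with h2 | h2
    · exact Or.inl h2
    · exact Or.inr h2

lemma pvSiftdown_it_mem {pos : Nat} {h : List (Int × String)} {it : Int × String}
    (hp : pos < h.length) : it ∈ pvSiftdown h pos it := by
  fun_induction pvSiftdown h pos it with
  | case1 h pos hpos pp par hlt ih => exact ih (by simp; omega)
  | case2 h pos hpos pp par hlt =>
    have hlen : pos < (h.set pos it).length := by simpa using hp
    exact List.mem_iff_getElem.mpr ⟨pos, hlen, List.getElem_set_self _⟩
  | case3 h pos hpos =>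
    have hlen : pos < (h.set pos it).length := by simpa using hp
    exact List.mem_iff_getElem.mpr ⟨pos, hlen, List.getElem_set_self _⟩

lemma pvSiftdown_getD_zero {pos : Nat} {h : List (Int × String)} {it : Int × String}
    (hpos : 0 < pos) (hp : pos < h.length)
    (hlt : pvLt it (h.getD 0 (0, "")) = false) :
    (pvSiftdown h pos it).getD 0 (0, "") = h.getD 0 (0, "") := by
  fun_induction pvSiftdown h pos it with
  | case1 h pos hpos' pp par hlt' ih =>
    by_cases hpp : pp = 0
    · exfalso
      have hpar : par = h.getD 0 (0, "") := by simp only [par, hpp]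
      rw [hpar, hlt] at hlt'; simp at hlt'
    · have h0 : (h.set pos par).getD 0 (0, "") = h.getD 0 (0, "") := pv_getD_set_ne (by omega)
      rw [ih (by omega) (by simp; omega) (by rw [h0]; exact hlt)]
      exact h0
  | case2 h pos hpos' pp par hlt' => exact pv_getD_set_ne (by omega)
  | case3 h pos hpos' => omega

lemma pvLt_asymm {a b : Int × String} (h : pvLt a b = true) : pvLt b a = false := by
  rw [pvLt_iff] at h; rw [pvLt_eq_false]
  rcases h with h | ⟨h, h'⟩
  · exact ⟨by omega, fun g => by omega⟩
  · exact ⟨by omega, fun _ => not_lt.mpr (le_of_lt h')⟩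

def PvInv (h : List (Int × String)) (pos : Nat) (it : Int × String) : Prop :=
  pos < h.length ∧
  (∀ i, 0 < i → i < h.length → i ≠ pos → (i - 1) / 2 ≠ pos →
    pvLt (h.getD i (0, "")) (h.getD ((i - 1) / 2) (0, "")) = false) ∧
  (∀ i, 0 < i → i < h.length → (i - 1) / 2 = pos → pvLt (h.getD i (0, "")) it = false) ∧
  (∀ i, 0 < i → i < h.length → (i - 1) / 2 = pos → 0 < pos →
    pvLt (h.getD i (0, "")) (h.getD ((pos - 1) / 2) (0, "")) = false)

lemma pvSiftdown_heap {pos : Nat} {h : List (Int × String)} {it : Int × String}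
    (hinv : PvInv h pos it) : PvHeap (pvSiftdown h pos it) := by
  fun_induction pvSiftdown h pos it with
  | case1 h pos hpos pp par hlt ih =>
    obtain ⟨h1, h2, h3, h4⟩ := hinv
    apply ih
    refine ⟨by simp; omega, ?_, ?_, ?_⟩
    · intro i hi0 hilen hine hipar
      have hilen' : i < h.length := by simpa using hilen
      have hipos : i ≠ pos := by intro he; subst he; exact hipar rfl
      by_cases hg : (i - 1) / 2 = pos
      · rw [pv_getD_set_ne hipos, hg, pv_getD_set_eq h1]
        exact h4 i hi0 hilen' hg hpos
      · rw [pv_getD_set_ne hipos, pv_getD_set_ne hg]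
        exact h2 i hi0 hilen' hipos hg
    · intro i hi0 hilen hipp
      have hilen' : i < h.length := by simpa using hilen
      by_cases hip : i = pos
      · subst hip; rw [pv_getD_set_eq h1]; exact pvLt_asymm hlt
      · rw [pv_getD_set_ne hip]
        have hne : (i - 1) / 2 ≠ pos := by omega
        have := h2 i hi0 hilen' hip hne
        rw [hipp] at this
        exact pvLt_asymm (pvLt_lt_of_lt_of_le hlt this)
    · intro i hi0 hilen hipp hpp0
      have hilen' : i < h.length := by simpa using hilen
      have hgp : (pp - 1) / 2 ≠ pos := by omega
      rw [pv_getD_set_ne hgp]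
      by_cases hip : i = pos
      · subst hip; rw [pv_getD_set_eq h1]
        exact h2 pp hpp0 (by omega) (by omega) (by omega)
      · rw [pv_getD_set_ne hip]
        have hne : (i - 1) / 2 ≠ pos := by omega
        have hi_pp := h2 i hi0 hilen' hip hne
        rw [hipp] at hi_pp
        have hpp_gp := h2 pp hpp0 (by omega) (by omega) (by omega)
        exact pvLe_trans hpp_gp hi_pp
  | case2 h pos hpos pp par hlt =>
    obtain ⟨h1, h2, h3, h4⟩ := hinv
    intro i hi0 hilen
    have hilen' : i < h.length := by simpa using hilen
    by_cases hip : i = pos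
    · subst hip
      rw [pv_getD_set_eq h1, pv_getD_set_ne (by omega : (i - 1) / 2 ≠ i)]
      exact Bool.not_eq_true _ ▸ (by simpa using hlt)
    · rw [pv_getD_set_ne hip]
      by_cases hg : (i - 1) / 2 = pos
      · rw [hg, pv_getD_set_eq h1]; exact h3 i hi0 hilen' hg
      · rw [pv_getD_set_ne hg]; exact h2 i hi0 hilen' hip hg
  | case3 h pos hpos =>
    obtain ⟨h1, h2, h3, h4⟩ := hinv
    have hpos0 : pos = 0 := by omega
    subst hpos0
    intro i hi0 hilen
    have hilen' : i < h.length := by simpa using hilen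
    rw [pv_getD_set_ne (by omega : i ≠ 0)]
    by_cases hg : (i - 1) / 2 = 0
    · rw [hg, pv_getD_set_eq h1]; exact h3 i hi0 hilen' hg
    · rw [pv_getD_set_ne hg]; exact h2 i hi0 hilen' (by omega) hg

lemma pvHeap_root_le {l : List (Int × String)} (hh : PvHeap l) :
    ∀ i, i < l.length → pvLt (l.getD i (0, "")) (l.getD 0 (0, "")) = false := by
  intro i
  induction i using Nat.strong_induction_on with
  | _ i ih =>
    intro hilen
    rcases Nat.eq_zero_or_pos i with h0 | h0
    · subst h0; exact pvLt_irrefl _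
    · exact pvLe_trans (ih ((i - 1) / 2) (by omega) (by omega)) (hh i h0 hilen)

lemma pvHeap_root_le_mem {l : List (Int × String)} (hh : PvHeap l) {x : Int × String}
    (hx : x ∈ l) : pvLt x (l.getD 0 (0, "")) = false := by
  obtain ⟨i, hi, rfl⟩ := List.mem_iff_getElem.mp hx
  rw [← List.getD_eq_getElem l (0, "") hi]
  exact pvHeap_root_le hh i hi


lemma pv_getD_append {l l' : List (Int × String)} {i : Nat} {j : Int × String}
    (h : i < l.length) : (l ++ l').getD i j = l.getD i j := by
  simp [List.getD, List.getElem?_append_left h]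

lemma pvHeappush_length {h : List (Int × String)} {it : Int × String} :
    (pvHeappush h it).length = h.length + 1 := by
  simp [pvHeappush, pvSiftdown_length]

lemma pvHeappush_heap {h : List (Int × String)} {it : Int × String} (hh : PvHeap h) :
    PvHeap (pvHeappush h it) := by
  apply pvSiftdown_heap
  refine ⟨by simp, ?_, ?_, ?_⟩
  · intro i hi0 hilen hine _
    have hi : i < h.length := by simp at hilen; omega
    rw [pv_getD_append hi, pv_getD_append (by omega)]
    exact hh i hi0 hi
  · intro i hi0 hilen hip; simp at hilen; omega
  · intro i hi0 hilen hip _; simp at hilen; omega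

lemma pvHeappush_getD_zero {h : List (Int × String)} {it : Int × String}
    (hh : PvHeap h) (hne : h ≠ []) :
    (pvHeappush h it).getD 0 (0, "") =
      if pvLt it (h.getD 0 (0, "")) = true then it else h.getD 0 (0, "") := by
  have hlen : 0 < h.length := List.length_pos_iff.mpr hne
  by_cases hc : pvLt it (h.getD 0 (0, "")) = true
  · simp only [hc, if_true]
    set r := pvHeappush h it with hr
    have hrheap : PvHeap r := pvHeappush_heap hh
    have hrlen : 0 < r.length := by rw [hr, pvHeappush_length]; omega
    have hitmem : it ∈ r := pvSiftdown_it_mem (by simp)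
    have hroot_it : pvLt it (r.getD 0 (0, "")) = false := pvHeap_root_le_mem hrheap hitmem
    have hr0mem : r.getD 0 (0, "") ∈ r := pv_getD_mem hrlen
    rcases pvSiftdown_mem (by simp) hr0mem with hmem | heq
    · rcases List.mem_append.mp hmem with hmem | hmem
      · exfalso
        have : pvLt (r.getD 0 (0, "")) (h.getD 0 (0, "")) = false := pvHeap_root_le_mem hh hmem
        have : pvLt it (r.getD 0 (0, "")) = true := pvLt_lt_of_lt_of_le hc this
        rw [this] at hroot_it; simp at hroot_it
      · simpa using hmem
    · exact heq
  · rw [Bool.not_eq_true] at hc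
    simp only [hc, Bool.false_eq_true, if_false]
    have hc' : pvLt it ((h ++ [it]).getD 0 (0, "")) = false := by
      rw [pv_getD_append hlen]; exact hc
    rw [pvHeappush, pvSiftdown_getD_zero hlen (by simp) hc', pv_getD_append hlen]

-- universe of possible queue entries
def pvU (info : pvInfo) : List String :=
  info.flatMap (fun kv => PySem.Dict.getD (PySem.Dict.mk kv.2) "IS_A" [])

lemma pvIsaB_subset_U {info : pvInfo} {x y : String} (h : y ∈ pvIsaB info x) : y ∈ pvU info := by
  revert h
  induction info with
  | nil =>
    intro h
    simp [pvIsaB, PySem.Dict.getD, PySem.Dict.get?] at h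
  | cons kv rest ih =>
    intro h
    rw [pvIsaB, PySem.Dict.get?_mk_cons] at h
    by_cases hk : kv.1 == x
    · simp only [hk, if_pos] at h
      simp only [pvU, List.flatMap_cons, List.mem_append]
      left; simpa using h
    · simp only [hk, Bool.false_eq_true, if_false] at h
      simp only [pvU, List.flatMap_cons, List.mem_append]
      right; exact ih (by rw [pvIsaB]; exact h)

lemma pvFuelA_isa (info : pvInfo) : pvFuelA info "IS_A" = 2 + 2 * (pvU info).length := rfl
lemma pvFuelB_eq (info : pvInfo) : pvFuelB info = 2 + 2 * (pvU info).length := rfl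

-- measures
def pvMuA (info : pvInfo) (qa : List (String × Int)) (once : PySem.Set String) : Nat :=
  qa.length + 2 * ((pvU info).filter (fun y => !(PySem.Set.contains once y))).length

def pvMuB (info : pvInfo) (qb : List (String × Int)) (dist : PySem.Dict String Int) : Nat :=
  qb.length + 2 * ((pvU info).filter (fun y => !(dist.contains y))).length

lemma pv_filter_add_lt {U : List String} {s : PySem.Set String} {p : String}
    (hp : p ∈ U) (hnp : PySem.Set.contains s p = false) :
    ((U.filter (fun y => !(PySem.Set.contains (PySem.Set.add s p) y))).length + 1 ≤
      (U.filter (fun y => !(PySem.Set.contains s y))).length) := by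
  have hadd : ∀ y, PySem.Set.contains (PySem.Set.add s p) y =
      (PySem.Set.contains s y || y == p) := by
    intro y
    rw [PySem.Set.add_eq_ite, if_neg (by
      intro hmem
      rw [(PySem.Set.contains_iff _ _).mpr hmem] at hnp; simp at hnp)]
    simp only [PySem.Set.contains_eq_listContains, List.contains_append]
    by_cases hyp : y = p <;> simp [hyp]
  have heq : (U.filter (fun y => !(PySem.Set.contains (PySem.Set.add s p) y))) =
      (U.filter (fun y => !(PySem.Set.contains s y))).filter (fun y => !(y == p)) := by
    rw [List.filter_filter]
    apply List.filter_congr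
    intro y _
    rw [hadd y]
    cases PySem.Set.contains s y <;> cases (y == p) <;> simp
  rw [heq]
  have hpns : p ∉ s := by
    intro hm; rw [(PySem.Set.contains_iff _ _).mpr hm] at hnp; simp at hnp
  have hpf : p ∈ (U.filter (fun y => !(PySem.Set.contains s y))) :=
    List.mem_filter.mpr ⟨hp, by simpa using hpns⟩
  have := List.length_filter_lt_length_iff_exists (l := U.filter (fun y => !(PySem.Set.contains s y)))
    (p := fun y => !(y == p))
  have hlt := this.mpr ⟨p, hpf, by simp⟩
  omega

lemma pv_filter_insert_lt {U : List String} {dist : PySem.Dict String Int} {p : String} {v : Int}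
    (hp : p ∈ U) (hnp : dist.contains p = false) :
    ((U.filter (fun y => !((dist.insert p v).contains y))).length + 1 ≤
      (U.filter (fun y => !(dist.contains y))).length) := by
  have heq : (U.filter (fun y => !((dist.insert p v).contains y))) =
      (U.filter (fun y => !(dist.contains y))).filter (fun y => !(y == p)) := by
    rw [List.filter_filter]
    apply List.filter_congr
    intro y _
    rw [PySem.Dict.contains_insert]
    cases dist.contains y <;> cases (y == p) <;> simp
  rw [heq]
  have hpf : p ∈ (U.filter (fun y => !(dist.contains y))) :=
    List.mem_filter.mpr ⟨hp, by simp [hnp]⟩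
  have := List.length_filter_lt_length_iff_exists (l := U.filter (fun y => !(dist.contains y)))
    (p := fun y => !(y == p))
  have hlt := this.mpr ⟨p, hpf, by simp⟩
  omega

-- ===== reach closure facts =====
lemma pv_mem_foldl_update {f : String → List String} :
    ∀ (l : List String) (t : PySem.Set String) (y : String), y ∈ t →
      y ∈ l.foldl (fun t a => PySem.Set.update t (f a)) t := by
  intro l
  induction l with
  | nil => intro t y hy; exact hy
  | cons a rest ih =>
    intro t y hy
    exact ih _ y ((PySem.Set.mem_update _ _ _).mpr (Or.inl hy))

lemma pv_mem_foldl_update_edge {f : String → List String} :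
    ∀ (l : List String) (t : PySem.Set String) (x y : String), x ∈ l → y ∈ f x →
      y ∈ l.foldl (fun t a => PySem.Set.update t (f a)) t := by
  intro l
  induction l with
  | nil => intro t x y hx; exact absurd hx (List.not_mem_nil)
  | cons a rest ih =>
    intro t x y hx hy
    rcases List.mem_cons.mp hx with rfl | hx'
    · exact pv_mem_foldl_update rest _ y ((PySem.Set.mem_update _ _ _).mpr (Or.inr hy))
    · exact ih _ x y hx' hy

lemma pv_foldl_update_members {f : String → List String} :
    ∀ (l : List String) (t : PySem.Set String) (y : String),
      y ∈ l.foldl (fun t a => PySem.Set.update t (f a)) t →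
      y ∈ t ∨ ∃ x ∈ l, y ∈ f x := by
  intro l
  induction l with
  | nil => intro t y hy; exact Or.inl hy
  | cons a rest ih =>
    intro t y hy
    rcases ih _ y hy with hy' | ⟨x, hx, hyx⟩
    · rcases (PySem.Set.mem_update _ _ _).mp hy' with hy'' | hy''
      · exact Or.inl hy''
      · exact Or.inr ⟨a, List.mem_cons_self, hy''⟩
    · exact Or.inr ⟨x, List.mem_cons.mpr (Or.inr hx), hyx⟩

lemma pv_mem_expand_of_mem {info : pvInfo} {s : PySem.Set String} {y : String} (hy : y ∈ s) :
    y ∈ pvExpand info s := pv_mem_foldl_update s s y hy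

lemma pv_mem_expand_edge {info : pvInfo} {s : PySem.Set String} {x y : String}
    (hx : x ∈ s) (hy : y ∈ pvIsaB info x) : y ∈ pvExpand info s :=
  pv_mem_foldl_update_edge s s x y hx hy

lemma pv_expand_members {info : pvInfo} {s : PySem.Set String} {y : String}
    (hy : y ∈ pvExpand info s) : y ∈ s ∨ ∃ x ∈ s, y ∈ pvIsaB info x :=
  pv_foldl_update_members s s y hy

lemma pv_prefix_update (t : PySem.Set String) (xs : List String) : t <+: PySem.Set.update t xs := by
  rw [PySem.Set.update]
  induction xs generalizing t with
  | nil => exact List.prefix_refl t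
  | cons a rest ih =>
    refine List.IsPrefix.trans ?_ (ih (PySem.Set.add t a))
    rw [PySem.Set.add_eq_ite]
    split
    · exact List.prefix_refl t
    · exact List.prefix_append t [a]

lemma pv_prefix_foldl_update {f : String → List String} :
    ∀ (l : List String) (t : PySem.Set String),
      t <+: l.foldl (fun t a => PySem.Set.update t (f a)) t := by
  intro l
  induction l with
  | nil => intro t; exact List.prefix_refl t
  | cons a rest ih =>
    intro t
    exact List.IsPrefix.trans (pv_prefix_update t (f a)) (ih _)

lemma pv_prefix_expand (info : pvInfo) (s : PySem.Set String) : s <+: pvExpand info s :=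
  pv_prefix_foldl_update s s

lemma pv_nodup_foldl_update {f : String → List String} :
    ∀ (l : List String) (t : PySem.Set String), t.Nodup →
      (l.foldl (fun t a => PySem.Set.update t (f a)) t).Nodup := by
  intro l
  induction l with
  | nil => intro t ht; exact ht
  | cons a rest ih => intro t ht; exact ih _ (PySem.Set.nodup_update _ _ ht)

lemma pv_nodup_expand {info : pvInfo} {s : PySem.Set String} (hs : s.Nodup) :
    (pvExpand info s).Nodup := pv_nodup_foldl_update s s hs

lemma pv_expand_subset_V {info : pvInfo} {code : String} {s : PySem.Set String}
    (hs : ∀ y ∈ s, y ∈ code :: pvU info) :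
    ∀ y ∈ pvExpand info s, y ∈ code :: pvU info := by
  intro y hy
  rcases pv_expand_members hy with hy' | ⟨x, _, hyx⟩
  · exact hs y hy'
  · exact List.mem_cons.mpr (Or.inr (pvIsaB_subset_U hyx))

lemma pv_reachAux_fixed {info : pvInfo} {s : PySem.Set String} (hfix : pvExpand info s = s) :
    ∀ n, pvReachAux info n s = s := by
  intro n
  induction n with
  | zero => rfl
  | succ n ih => rw [pvReachAux, hfix]; exact ih

lemma pv_sat {info : pvInfo} {code : String} :
    ∀ (n : Nat) (s : PySem.Set String), s.Nodup → (∀ y ∈ s, y ∈ code :: pvU info) →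
      (code :: pvU info).toFinset.card ≤ s.length + n →
      pvExpand info (pvReachAux info n s) = pvReachAux info n s := by
  intro n
  induction n with
  | zero =>
    intro s hnd hsub hcard
    have hlen : s.length ≤ (code :: pvU info).toFinset.card := by
      rw [← List.toFinset_card_of_nodup hnd]
      exact Finset.card_le_card (fun a ha => List.mem_toFinset.mpr (hsub a (List.mem_toFinset.mp ha)))
    have hle : s.length = (code :: pvU info).toFinset.card := by omega
    have hpre := pv_prefix_expand info s
    have hexl : (pvExpand info s).length ≤ (code :: pvU info).toFinset.card := by
      rw [← List.toFinset_card_of_nodup (pv_nodup_expand hnd)]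
      exact Finset.card_le_card (fun a ha =>
        List.mem_toFinset.mpr (pv_expand_subset_V hsub a (List.mem_toFinset.mp ha)))
    have : (pvExpand info s).length = s.length := by
      have := hpre.length_le; omega
    exact (List.IsPrefix.eq_of_length hpre this.symm).symm
  | succ n ih =>
    intro s hnd hsub hcard
    by_cases hfix : pvExpand info s = s
    · rw [pvReachAux, hfix, pv_reachAux_fixed hfix, hfix]
    · rw [pvReachAux]
      have hpre := pv_prefix_expand info s
      have hlt : s.length < (pvExpand info s).length := by
        rcases Nat.lt_or_ge s.length (pvExpand info s).length with h | h
        · exact h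
        · exact absurd (List.IsPrefix.eq_of_length hpre (by have := hpre.length_le; omega)).symm hfix
      exact ih (pvExpand info s) (pv_nodup_expand hnd) (pv_expand_subset_V hsub) (by omega)

lemma pv_reach_sat (info : pvInfo) (code : String) :
    pvExpand info (pvReach info code) = pvReach info code := by
  rw [pvReach]
  apply pv_sat (code := code)
  · simp [PySem.Set.add, PySem.Set.empty]
  · intro y hy
    simp [PySem.Set.add, PySem.Set.empty] at hy
    simp [hy]
  · have h1 : (code :: pvU info).toFinset.card ≤ (code :: pvU info).length :=
      List.toFinset_card_le _
    have h2 : (PySem.Set.add PySem.Set.empty code).length = 1 := by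
      simp [PySem.Set.add, PySem.Set.empty]
    have h3 : (info.flatMap (fun kv => PySem.Dict.getD (PySem.Dict.mk kv.2) "IS_A" [])) = pvU info := rfl
    rw [h2, h3, List.length_cons] at *
    omega

lemma pv_reach_closed {info : pvInfo} {code x y : String}
    (hx : x ∈ pvReach info code) (hy : y ∈ pvIsaB info x) : y ∈ pvReach info code := by
  rw [← pv_reach_sat info code]
  exact pv_mem_expand_edge hx hy

lemma pv_mem_reachAux_of_mem {info : pvInfo} {s : PySem.Set String} {x : String} (hx : x ∈ s) :
    ∀ n, x ∈ pvReachAux info n s := by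
  intro n
  induction n generalizing s with
  | zero => exact hx
  | succ n ih => exact ih (pv_mem_expand_of_mem hx)

lemma pv_code_mem_reach (info : pvInfo) (code : String) : code ∈ pvReach info code := by
  rw [pvReach]
  exact pv_mem_reachAux_of_mem (by simp [PySem.Set.add, PySem.Set.empty]) _

lemma pv_reach_min {info : pvInfo} {P : String → Prop}
    (hclosed : ∀ a, P a → ∀ y ∈ pvIsaB info a, P y) :
    ∀ {s : PySem.Set String} (_ : ∀ a ∈ s, P a) (n : Nat),
      ∀ x ∈ pvReachAux info n s, P x := by
  intro s hs n
  induction n generalizing s with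
  | zero => exact hs
  | succ n ih =>
    intro x hx
    rw [pvReachAux] at hx
    refine ih (fun a ha => ?_) x hx
    rcases pv_expand_members ha with ha' | ⟨b, hb, hab⟩
    · exact hs a ha'
    · exact hclosed b (hs b hb) a hab

-- ===== the simulation relation between A's and B's BFS states =====
lemma pv_contains_of_get? {κ ν : Type} [BEq κ] [LawfulBEq κ] {d : PySem.Dict κ ν} {k : κ} {v : ν}
    (h : d.get? k = some v) : d.contains k = true := by
  cases hc : d.contains k
  · rw [(PySem.Dict.get?_eq_none_iff_contains _ _).mpr hc] at h; cases h
  · rfl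

lemma pv_get?_of_contains {κ ν : Type} [BEq κ] [LawfulBEq κ] {d : PySem.Dict κ ν} {k : κ}
    (h : d.contains k = true) : ∃ v, d.get? k = some v := by
  cases hg : d.get? k
  · rw [(PySem.Dict.get?_eq_none_iff_contains _ _).mp hg] at h; cases h
  · exact ⟨_, rfl⟩

structure PvMid (info : pvInfo) (code x : String) (dx : Int) (pend todoX : List String)
    (qA : List (String × Int)) (ret : PySem.Dict String (List (Int × String)))
    (once : PySem.Set String) (qB : List (String × Int)) (dist : PySem.Dict String Int)
    (best : PySem.Dict String String) : Prop where
  shape : qA = qB ∨ ∃ l1 d l2, qB = l1 ++ l2 ∧ qA = l1 ++ (code, d) :: l2 ∧ 1 ≤ d ∧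
    PySem.Set.contains once code = true
  keysEq : ret.keys = dist.keys
  distKeys : dist.keys = code :: best.keys
  nodupK : dist.keys.Nodup
  onceEq : ∀ p, p ≠ code → PySem.Set.contains once p = dist.contains p
  isaCode : ∀ p ∈ pvIsaB info code, p ∈ pend ∨
    (dist.contains p = true ∧ (p ≠ code → dist.getD p 0 = 1))
  heaps : ∀ p, p ≠ code → dist.contains p = true →
    PvHeap (ret.getD p []) ∧ (ret.getD p []).getD 0 (0, "") = (dist.getD p 0, best.getD p "") ∧
    ret.getD p [] ≠ []
  qbDist : ∀ e ∈ qB, dist.get? e.1 = some e.2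
  qbSorted : List.Pairwise (fun a b : String × Int => a.2 ≤ b.2) qB
  qbLo : ∀ e ∈ qB, dx ≤ e.2
  qbHi : ∀ e ∈ qB, e.2 ≤ dx + 1
  valBound : ∀ p v, dist.get? p = some v → ∀ e ∈ qB, v ≤ e.2 + 1
  valBoundX : ∀ p v, dist.get? p = some v → v ≤ dx + 1
  edgeBest : ∀ p, best.contains p = true →
    p ∈ pvIsaB info (best.getD p "") ∧ dist.contains (best.getD p "") = true ∧
    dist.getD (best.getD p "") 0 + 1 = dist.getD p 0
  distCode : dist.get? code = some 0
  distPos : ∀ p, p ≠ code → dist.contains p = true → 1 ≤ dist.getD p 0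
  closedX : ∀ y ∈ pvIsaB info x, y ∈ todoX ∨ dist.contains y = true
  closedK : ∀ p ∈ dist.keys, p = x ∨ (∃ e ∈ qB, e.1 = p) ∨
    ∀ y ∈ pvIsaB info p, dist.contains y = true
  keysReach : ∀ p ∈ dist.keys, p ∈ pvReach info code
  xDist : dist.get? x = some dx

lemma pvMid_dx_nonneg {info code x dx pend todoX qA ret once qB dist best}
    (m : PvMid info code x dx pend todoX qA ret once qB dist best) : 0 ≤ dx := by
  by_cases hx : x = code
  · subst hx
    have := m.xDist; rw [m.distCode] at this; injection this with h; omega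
  · have h1 := m.distPos x hx (pv_contains_of_get? m.xDist)
    rw [PySem.Dict.getD_of_get?_eq_some _ 0 m.xDist] at h1
    omega

lemma pvMid_mem_best_keys {info code x dx pend todoX qA ret once qB dist best}
    (m : PvMid info code x dx pend todoX qA ret once qB dist best) (p : String) :
    (best.contains p = true) ↔ (dist.contains p = true ∧ p ≠ code) := by
  rw [PySem.Dict.contains_iff_mem_keys, PySem.Dict.contains_iff_mem_keys, m.distKeys]
  have hnd := m.nodupK
  rw [m.distKeys] at hnd
  constructor
  · intro h
    refine ⟨List.mem_cons.mpr (Or.inr h), ?_⟩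
    intro he; subst he
    exact (List.nodup_cons.mp hnd).1 h
  · rintro ⟨h1, h2⟩
    rcases List.mem_cons.mp h1 with h | h
    · exact absurd h h2
    · exact h

lemma pv_bool_eq_of_iff {a b : Bool} (h : a = true ↔ b = true) : a = b := by
  cases a <;> cases b <;> simp_all

lemma pv_contains_add_of {s : PySem.Set String} {y p : String}
    (h : PySem.Set.contains s y = true) : PySem.Set.contains (PySem.Set.add s p) y = true :=
  (PySem.Set.contains_iff _ _).mpr ((PySem.Set.mem_add _ _ _).mpr (Or.inl ((PySem.Set.contains_iff _ _).mp h)))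

lemma pv_contains_add_self (s : PySem.Set String) (p : String) :
    PySem.Set.contains (PySem.Set.add s p) p = true :=
  (PySem.Set.contains_iff _ _).mpr ((PySem.Set.mem_add _ _ _).mpr (Or.inr rfl))

lemma pv_contains_add_other {s : PySem.Set String} {y p : String} (hne : y ≠ p) :
    PySem.Set.contains (PySem.Set.add s p) y = PySem.Set.contains s y := by
  apply pv_bool_eq_of_iff
  rw [PySem.Set.contains_iff, PySem.Set.contains_iff, PySem.Set.mem_add]
  constructor
  · rintro (h | h)
    · exact h
    · exact absurd h hne
  · exact Or.inl

lemma pvHeappush_nil (it : Int × String) : pvHeappush [] it = [it] := by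
  simp [pvHeappush, pvSiftdown]

-- proof-side names for the two fold bodies (definitionally the ports' lambdas)
def pvStepA (x : String) (dx : Int)
    (s : List (String × Int) × PySem.Dict String (List (Int × String)) × PySem.Set String)
    (p : String) :
    List (String × Int) × PySem.Dict String (List (Int × String)) × PySem.Set String :=
  let ret1 := if s.2.1.contains p then s.2.1 else s.2.1.insert p []
  let ret2 := ret1.modify p [] (fun h => pvHeappush h (dx + 1, x))
  if PySem.Set.contains s.2.2 p then (s.1, ret2, s.2.2)
  else (s.1 ++ [(p, dx + 1)], ret2, PySem.Set.add s.2.2 p)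

def pvStepB (x : String) (dx : Int)
    (s : List (String × Int) × PySem.Dict String Int × PySem.Dict String String)
    (p : String) :
    List (String × Int) × PySem.Dict String Int × PySem.Dict String String :=
  if !(s.2.1.contains p) then (s.1 ++ [(p, dx + 1)], s.2.1.insert p (dx + 1), s.2.2.insert p x)
  else if s.2.2.contains p && pvLt (dx + 1, x) (s.2.1.getD p 0, s.2.2.getD p "") then
    (s.1, s.2.1, s.2.2.insert p x)
  else s

lemma pvABfs_cons (info : pvInfo) (key : String) (f : Nat) (ex : String) (dis : Int)
    (qs : List (String × Int)) (ret : PySem.Dict String (List (Int × String)))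
    (once : PySem.Set String) :
    pvABfs info key (f + 1) ((ex, dis) :: qs) ret once =
      (fun s : List (String × Int) × PySem.Dict String (List (Int × String)) × PySem.Set String =>
        pvABfs info key f s.1 s.2.1 s.2.2)
        (List.foldl (pvStepA ex dis) (qs, ret, once) (pvInfoGetA info ex key)) := rfl

lemma pvBBfs_cons (info : pvInfo) (f : Nat) (x : String) (d : Int)
    (qs : List (String × Int)) (dist : PySem.Dict String Int) (best : PySem.Dict String String) :
    pvBBfs info (f + 1) ((x, d) :: qs) dist best =
      (fun s : List (String × Int) × PySem.Dict String Int × PySem.Dict String String =>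
        pvBBfs info f s.1 s.2.1 s.2.2)
        (List.foldl (pvStepB x d) (qs, dist, best) (pvIsaB info x)) := rfl

lemma pvStepLemma {info : pvInfo} {code x : String} {dx : Int} {pend rest : List String} {pc : String}
    {qA : List (String × Int)} {ret : PySem.Dict String (List (Int × String))} {once : PySem.Set String}
    {qB : List (String × Int)} {dist : PySem.Dict String Int} {best : PySem.Dict String String}
    (hsat : ∀ a ∈ pvReach info code, ∀ y ∈ pvIsaB info a, y ∈ pvReach info code)
    (hp : pc ∈ pvIsaB info x)
    (m : PvMid info code x dx pend (pc :: rest) qA ret once qB dist best)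
    (hpend : pend = [] ∨ (pend = pc :: rest ∧ x = code)) :
    ∃ pend', (pend' = [] ∨ (pend' = rest ∧ x = code)) ∧
      PvMid info code x dx pend' rest
        (pvStepA x dx (qA, ret, once) pc).1
        (pvStepA x dx (qA, ret, once) pc).2.1
        (pvStepA x dx (qA, ret, once) pc).2.2
        (pvStepB x dx (qB, dist, best) pc).1
        (pvStepB x dx (qB, dist, best) pc).2.1
        (pvStepB x dx (qB, dist, best) pc).2.2 ∧
      pvMuA info (pvStepA x dx (qA, ret, once) pc).1 (pvStepA x dx (qA, ret, once) pc).2.2 ≤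
        pvMuA info qA once ∧
      pvMuB info (pvStepB x dx (qB, dist, best) pc).1 (pvStepB x dx (qB, dist, best) pc).2.1 ≤
        pvMuB info qB dist := by
  have hdx0 : 0 ≤ dx := pvMid_dx_nonneg m
  have hxcode_dx : x = code → dx = 0 := by
    intro hxc
    have h1 := m.xDist; rw [hxc, m.distCode] at h1; injection h1 with h1; omega
  have hretdist : ∀ q, ret.contains q = dist.contains q := by
    intro q
    apply pv_bool_eq_of_iff
    rw [PySem.Dict.contains_iff_mem_keys, PySem.Dict.contains_iff_mem_keys, m.keysEq]
  have hpend' : ∃ pend'', (pend'' = [] ∨ (pend'' = rest ∧ x = code)) ∧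
      (∀ r, r ∈ pend → r = pc ∨ r ∈ pend'') := by
    rcases hpend with h | ⟨h, hxc⟩
    · exact ⟨[], Or.inl rfl, by subst h; intro r hr; cases hr⟩
    · exact ⟨rest, Or.inr ⟨rfl, hxc⟩, by subst h; intro r hr; simpa using hr⟩
  obtain ⟨pend'', hpend'', hpmem⟩ := hpend'
  refine ⟨pend'', hpend'', ?_⟩
  by_cases hcon : dist.contains pc = true
  · -- p already known
    have hretc : ret.contains pc = true := by rw [hretdist]; exact hcon
    have hretNkeys : ∀ g : List (Int × String) → List (Int × String),
        (ret.modify pc [] g).keys = ret.keys := by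
      intro g
      rw [PySem.Dict.keys_modify]
      exact PySem.Dict.keys_insert_of_contains _ _ hretc
    have hretNq : ∀ (g : List (Int × String) → List (Int × String)) q, q ≠ pc →
        (ret.modify pc [] g).getD q [] = ret.getD q [] := by
      intro g q hq
      exact PySem.Dict.getD_modify_of_ne _ _ _ hq
    by_cases hpcc : pc = code
    · -- p = code: B skips (code has no best entry), A pushes into the unread heap of code
      subst hpcc
      have hbestc : best.contains pc = false := by
        cases hb : best.contains pc
        · rfl
        · exact absurd ((pvMid_mem_best_keys m pc).mp hb).2 (by simp)
      have hstepB : pvStepB x dx (qB, dist, best) pc = (qB, dist, best) := by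
        simp [pvStepB, hcon, hbestc]
      set retN := ret.modify pc [] (fun h => pvHeappush h (dx + 1, x)) with hretN
      have hKeysEq : retN.keys = dist.keys := by rw [hretN, hretNkeys, m.keysEq]
      have hIsaCode : ∀ r ∈ pvIsaB info pc, r ∈ pend'' ∨
          (dist.contains r = true ∧ (r ≠ pc → dist.getD r 0 = 1)) := by
        intro r hr
        rcases m.isaCode r hr with hmem | hfacts
        · rcases hpmem r hmem with rfl | hmem'
          · exact Or.inr ⟨hcon, fun hne => absurd rfl hne⟩
          · exact Or.inl hmem'
        · exact Or.inr hfacts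
      have hHeaps : ∀ q, q ≠ pc → dist.contains q = true →
          PvHeap (retN.getD q []) ∧ (retN.getD q []).getD 0 (0, "") = (dist.getD q 0, best.getD q "") ∧
          retN.getD q [] ≠ [] := by
        intro q hq hqc
        rw [hretN, hretNq _ q hq]
        exact m.heaps q hq hqc
      have hClosedX : ∀ y ∈ pvIsaB info x, y ∈ rest ∨ dist.contains y = true := by
        intro y hy
        rcases m.closedX y hy with hmem | hc
        · rcases List.mem_cons.mp hmem with rfl | hmem'
          · exact Or.inr hcon
          · exact Or.inl hmem'
        · exact Or.inr hc
      by_cases honc : PySem.Set.contains once pc = true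
      · have hponce : pc ∈ once := (PySem.Set.contains_iff _ _).mp honc
        have hstepA : pvStepA x dx (qA, ret, once) pc = (qA, retN, once) := by
          simp [pvStepA, hretc, hponce, ← hretN]
        rw [hstepA, hstepB]
        refine ⟨{ shape := m.shape, keysEq := hKeysEq, distKeys := m.distKeys,
                  nodupK := m.nodupK, onceEq := m.onceEq, isaCode := hIsaCode,
                  heaps := hHeaps, qbDist := m.qbDist, qbSorted := m.qbSorted,
                  qbLo := m.qbLo, qbHi := m.qbHi, valBound := m.valBound,
                  valBoundX := m.valBoundX, edgeBest := m.edgeBest, distCode := m.distCode,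
                  distPos := m.distPos, closedX := hClosedX, closedK := m.closedK,
                  keysReach := m.keysReach, xDist := m.xDist }, le_refl _, le_refl _⟩
      · have honc' : PySem.Set.contains once pc = false := by simpa using honc
        have hponce : pc ∉ once := by
          intro hm; rw [(PySem.Set.contains_iff _ _).mpr hm] at honc'; cases honc'
        have hqeq : qA = qB := by
          rcases m.shape with h | ⟨l1, d, l2, h1, h2, h3, h4⟩
          · exact h
          · rw [h4] at honc'; cases honc'
        have hstepA : pvStepA x dx (qA, ret, once) pc =
            (qA ++ [(pc, dx + 1)], retN, PySem.Set.add once pc) := by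
          simp [pvStepA, hretc, hponce, ← hretN]
        rw [hstepA, hstepB]
        refine ⟨{ shape := ?_, keysEq := hKeysEq, distKeys := m.distKeys,
                  nodupK := m.nodupK, onceEq := ?_, isaCode := hIsaCode,
                  heaps := hHeaps, qbDist := m.qbDist, qbSorted := m.qbSorted,
                  qbLo := m.qbLo, qbHi := m.qbHi, valBound := m.valBound,
                  valBoundX := m.valBoundX, edgeBest := m.edgeBest, distCode := m.distCode,
                  distPos := m.distPos, closedX := hClosedX, closedK := m.closedK,
                  keysReach := m.keysReach, xDist := m.xDist }, ?_, le_refl _⟩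
        · right
          exact ⟨qB, dx + 1, [], by simp, by rw [hqeq], by omega, pv_contains_add_self _ _⟩
        · intro q hq
          rw [pv_contains_add_other hq]; exact m.onceEq q hq
        · have hpu : pc ∈ pvU info := pvIsaB_subset_U hp
          have := pv_filter_add_lt hpu honc'
          simp only [pvMuA, List.length_append, List.length_cons, List.length_nil]
          omega
    · -- p ≠ code: A pushes onto p's heap, B updates best[p] iff the pushed pair is smaller
      have hbestc : best.contains pc = true := (pvMid_mem_best_keys m pc).mpr ⟨hcon, hpcc⟩
      have honc : PySem.Set.contains once pc = true := by rw [m.onceEq pc hpcc]; exact hcon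
      obtain ⟨dpv, hdpv⟩ := pv_get?_of_contains hcon
      have hdp : dist.getD pc 0 = dpv := PySem.Dict.getD_of_get?_eq_some _ 0 hdpv
      have hdple : dpv ≤ dx + 1 := m.valBoundX pc dpv hdpv
      obtain ⟨hH, hHead, hNE⟩ := m.heaps pc hpcc hcon
      set retN := ret.modify pc [] (fun h => pvHeappush h (dx + 1, x)) with hretN
      have hponce2 : pc ∈ once := (PySem.Set.contains_iff _ _).mp honc
      have hstepA : pvStepA x dx (qA, ret, once) pc = (qA, retN, once) := by
        simp [pvStepA, hretc, hponce2, ← hretN]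
      have hretNp : retN.getD pc [] = pvHeappush (ret.getD pc []) (dx + 1, x) := by
        rw [hretN, PySem.Dict.getD_modify_self]
      have hheadN : (retN.getD pc []).getD 0 (0, "") =
          if pvLt (dx + 1, x) (dist.getD pc 0, best.getD pc "") = true then (dx + 1, x)
          else (dist.getD pc 0, best.getD pc "") := by
        rw [hretNp, pvHeappush_getD_zero hH hNE, hHead]
      have hheapN : PvHeap (retN.getD pc []) := by rw [hretNp]; exact pvHeappush_heap hH
      have hneN : retN.getD pc [] ≠ [] := by
        rw [hretNp]
        intro he
        have := pvHeappush_length (h := ret.getD pc []) (it := (dx + 1, x))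
        rw [he] at this; simp at this
      by_cases hlt : pvLt (dx + 1, x) (dist.getD pc 0, best.getD pc "") = true
      · -- strictly better pair: both sides switch to (dx+1, x); the distances agree
        have hdpeq : dpv = dx + 1 := by
          rcases (pvLt_iff _ _).mp hlt with h | ⟨h, _⟩ <;> rw [hdp] at h <;> omega
        have hxnepc : x ≠ pc := by
          intro he; subst he
          have := PySem.Dict.getD_of_get?_eq_some dist (k := x) 0 m.xDist
          rw [hdp] at this; omega
        have hstepB : pvStepB x dx (qB, dist, best) pc = (qB, dist, best.insert pc x) := by
          simp [pvStepB, hcon, hbestc, hlt]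
        rw [hstepA, hstepB]
        have hbk : (best.insert pc x).keys = best.keys :=
          PySem.Dict.keys_insert_of_contains _ _ hbestc
        have hbgD : ∀ q, (best.insert pc x).getD q "" = if q = pc then x else best.getD q "" :=
          fun q => PySem.Dict.getD_insert _ _ _ _ _
        have hbcon : ∀ q, (best.insert pc x).contains q = (q == pc || best.contains q) :=
          fun q => PySem.Dict.contains_insert _ _ _ _
        refine ⟨{ shape := m.shape, keysEq := by rw [hretN, hretNkeys, m.keysEq],
                  distKeys := by rw [m.distKeys, hbk], nodupK := m.nodupK,
                  onceEq := m.onceEq, isaCode := ?_, heaps := ?_, qbDist := m.qbDist,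
                  qbSorted := m.qbSorted, qbLo := m.qbLo, qbHi := m.qbHi,
                  valBound := m.valBound, valBoundX := m.valBoundX, edgeBest := ?_,
                  distCode := m.distCode, distPos := m.distPos, closedX := ?_,
                  closedK := m.closedK, keysReach := m.keysReach, xDist := m.xDist },
                le_refl _, le_refl _⟩
        · intro r hr
          rcases m.isaCode r hr with hmem | hfacts
          · rcases hpmem r hmem with rfl | hmem'
            · refine Or.inr ⟨hcon, fun _ => ?_⟩
              rw [hdp, hdpeq]
              rcases hpend with hpe | ⟨hpe, hxc⟩
              · rw [hpe] at hmem; cases hmem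
              · rw [hxcode_dx hxc]; omega
            · exact Or.inl hmem'
          · exact Or.inr hfacts
        · intro q hq hqc
          by_cases hqp : q = pc
          · subst hqp
            refine ⟨hheapN, ?_, hneN⟩
            rw [hheadN, if_pos hlt, hbgD, if_pos rfl, hdp, hdpeq]
          · rw [hretN, hretNq _ q hqp, hbgD, if_neg hqp]
            exact m.heaps q hq hqc
        · intro q hq
          rw [hbcon] at hq
          by_cases hqp : q = pc
          · subst hqp
            rw [hbgD, if_pos rfl]
            refine ⟨hp, pv_contains_of_get? m.xDist, ?_⟩
            rw [PySem.Dict.getD_of_get?_eq_some _ 0 m.xDist, hdp, hdpeq]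
          · simp [hqp] at hq
            obtain ⟨he1, he2, he3⟩ := m.edgeBest q hq
            rw [hbgD, if_neg hqp]
            exact ⟨he1, he2, he3⟩
        · intro y hy
          rcases m.closedX y hy with hmem | hc
          · rcases List.mem_cons.mp hmem with rfl | hmem'
            · exact Or.inr hcon
            · exact Or.inl hmem'
          · exact Or.inr hc
      · -- not better: B unchanged, the pushed pair sinks below the heap head
        have hlt' : pvLt (dx + 1, x) (dist.getD pc 0, best.getD pc "") = false := by
          simpa using hlt
        have hstepB : pvStepB x dx (qB, dist, best) pc = (qB, dist, best) := by
          simp [pvStepB, hcon, hlt']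
        rw [hstepA, hstepB]
        refine ⟨{ shape := m.shape, keysEq := by rw [hretN, hretNkeys, m.keysEq],
                  distKeys := m.distKeys, nodupK := m.nodupK,
                  onceEq := m.onceEq, isaCode := ?_, heaps := ?_, qbDist := m.qbDist,
                  qbSorted := m.qbSorted, qbLo := m.qbLo, qbHi := m.qbHi,
                  valBound := m.valBound, valBoundX := m.valBoundX, edgeBest := m.edgeBest,
                  distCode := m.distCode, distPos := m.distPos, closedX := ?_,
                  closedK := m.closedK, keysReach := m.keysReach, xDist := m.xDist },
                le_refl _, le_refl _⟩
        · intro r hr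
          rcases m.isaCode r hr with hmem | hfacts
          · rcases hpmem r hmem with rfl | hmem'
            · refine Or.inr ⟨hcon, fun _ => ?_⟩
              rcases hpend with hpe | ⟨hpe, hxc⟩
              · rw [hpe] at hmem; cases hmem
              · have hdx00 : dx = 0 := hxcode_dx hxc
                have h1le : 1 ≤ dpv := by
                  have := m.distPos _ hpcc hcon; rw [hdp] at this; exact this
                have : dpv ≤ dx + 1 := hdple
                rcases (pvLt_eq_false _ _).mp hlt' with ⟨hn1, _⟩
                rw [hdp] at *
                simp only at hn1
                omega
            · exact Or.inl hmem'
          · exact Or.inr hfacts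
        · intro q hq hqc
          by_cases hqp : q = pc
          · subst hqp
            refine ⟨hheapN, ?_, hneN⟩
            rw [hheadN, if_neg (by simp [hlt'])]
          · rw [hretN, hretNq _ q hqp]
            exact m.heaps q hq hqc
        · intro y hy
          rcases m.closedX y hy with hmem | hc
          · rcases List.mem_cons.mp hmem with rfl | hmem'
            · exact Or.inr hcon
            · exact Or.inl hmem'
          · exact Or.inr hc
  · -- NEW node pc
    have hcon' : dist.contains pc = false := by simpa using hcon
    have hpne : pc ≠ code := by
      intro he; subst he
      rw [pv_contains_of_get? m.distCode] at hcon'; cases hcon'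
    have honce : PySem.Set.contains once pc = false := by rw [m.onceEq pc hpne]; exact hcon'
    have hretc : ret.contains pc = false := by rw [hretdist]; exact hcon'
    have hxne : x ≠ pc := by
      intro he; subst he
      rw [pv_contains_of_get? m.xDist] at hcon'; cases hcon'
    have hbestc : best.contains pc = false := by
      cases hb : best.contains pc
      · rfl
      · exact absurd ((pvMid_mem_best_keys m pc).mp hb).1 (by simp [hcon'])
    have hponce : pc ∉ once := by
      intro hm; rw [(PySem.Set.contains_iff _ _).mpr hm] at honce; cases honce
    have hstepA : pvStepA x dx (qA, ret, once) pc =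
        (qA ++ [(pc, dx + 1)], (ret.insert pc []).modify pc [] (fun h => pvHeappush h (dx + 1, x)),
          PySem.Set.add once pc) := by
      simp [pvStepA, hretc, hponce]
    have hstepB : pvStepB x dx (qB, dist, best) pc =
        (qB ++ [(pc, dx + 1)], dist.insert pc (dx + 1), best.insert pc x) := by
      simp [pvStepB, hcon']
    rw [hstepA, hstepB]
    set retN := (ret.insert pc []).modify pc [] (fun h => pvHeappush h (dx + 1, x)) with hretN
    have hretNp : retN.getD pc [] = [(dx + 1, x)] := by
      rw [hretN, PySem.Dict.getD_modify_self]
      rw [PySem.Dict.getD_insert]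
      simp [pvHeappush_nil]
    have hretNq : ∀ q, q ≠ pc → retN.getD q [] = ret.getD q [] := by
      intro q hq
      rw [hretN, PySem.Dict.getD_modify_of_ne _ _ _ hq, PySem.Dict.getD_insert_of_ne _ _ _ hq]
    have hretNkeys : retN.keys = ret.keys ++ [pc] := by
      rw [hretN, PySem.Dict.keys_modify]
      rw [PySem.Dict.keys_insert_of_contains _ _ (by
        rw [PySem.Dict.contains_insert]; simp)]
      exact PySem.Dict.keys_insert_of_not_contains _ _ hretc
    have hdistk : (dist.insert pc (dx + 1)).keys = dist.keys ++ [pc] :=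
      PySem.Dict.keys_insert_of_not_contains _ _ hcon'
    have hbestk : (best.insert pc x).keys = best.keys ++ [pc] :=
      PySem.Dict.keys_insert_of_not_contains _ _ hbestc
    have hdget : ∀ q, (dist.insert pc (dx + 1)).get? q = if q = pc then some (dx + 1) else dist.get? q :=
      fun q => PySem.Dict.get?_insert _ _ _ _
    have hdgetD : ∀ q, (dist.insert pc (dx + 1)).getD q 0 = if q = pc then dx + 1 else dist.getD q 0 :=
      fun q => PySem.Dict.getD_insert _ _ _ _ _
    have hbgetD : ∀ q, (best.insert pc x).getD q "" = if q = pc then x else best.getD q "" :=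
      fun q => PySem.Dict.getD_insert _ _ _ _ _
    have hdcon : ∀ q, (dist.insert pc (dx + 1)).contains q = (q == pc || dist.contains q) :=
      fun q => PySem.Dict.contains_insert _ _ _ _
    have hbcon : ∀ q, (best.insert pc x).contains q = (q == pc || best.contains q) :=
      fun q => PySem.Dict.contains_insert _ _ _ _
    have hmuA : pvMuA info (qA ++ [(pc, dx + 1)]) (PySem.Set.add once pc) ≤ pvMuA info qA once := by
      have hpu : pc ∈ pvU info := pvIsaB_subset_U hp
      have := pv_filter_add_lt hpu honce
      simp only [pvMuA, List.length_append, List.length_cons, List.length_nil]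
      omega
    have hmuB : pvMuB info (qB ++ [(pc, dx + 1)]) (dist.insert pc (dx + 1)) ≤ pvMuB info qB dist := by
      have hpu : pc ∈ pvU info := pvIsaB_subset_U hp
      have := pv_filter_insert_lt (dist := dist) (v := dx + 1) hpu hcon'
      simp only [pvMuB, List.length_append, List.length_cons, List.length_nil]
      omega
    refine ⟨{ shape := ?_, keysEq := ?_, distKeys := ?_, nodupK := ?_, onceEq := ?_,
              isaCode := ?_, heaps := ?_, qbDist := ?_, qbSorted := ?_, qbLo := ?_,
              qbHi := ?_, valBound := ?_, valBoundX := ?_, edgeBest := ?_, distCode := ?_,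
              distPos := ?_, closedX := ?_, closedK := ?_, keysReach := ?_, xDist := ?_ },
            hmuA, hmuB⟩
    · -- shape
      rcases m.shape with h | ⟨l1, d, l2, h1, h2, h3, h4⟩
      · left; rw [h]
      · right
        exact ⟨l1, d, l2 ++ [(pc, dx + 1)], by rw [h1]; simp, by rw [h2]; simp, h3,
          pv_contains_add_of h4⟩
    · -- keysEq
      rw [hretNkeys, hdistk, m.keysEq]
    · -- distKeys
      rw [hdistk, hbestk, m.distKeys]; rfl
    · -- nodupK
      rw [hdistk]
      have h1 := m.nodupK
      simp only [List.nodup_append, List.nodup_cons]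
      refine ⟨h1, by simp, ?_⟩
      intro a ha b hb
      simp at hb; subst hb
      intro he; subst he
      rw [(PySem.Dict.contains_iff_mem_keys _ _).mpr ha] at hcon'; cases hcon'
    · -- onceEq
      intro q hq
      by_cases hqp : q = pc
      · subst hqp
        rw [pv_contains_add_self, hdcon]; simp
      · rw [pv_contains_add_other hqp, hdcon, m.onceEq q hq]
        simp [hqp]
    · -- isaCode
      intro r hr
      rcases m.isaCode r hr with hmem | ⟨h1, h2⟩
      · rcases hpmem r hmem with rfl | hmem'
        · right
          refine ⟨by rw [hdcon]; simp, ?_⟩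
          intro _
          rw [hdgetD]; simp
          rcases hpend with hpe | ⟨hpe, hxc⟩
          · rw [hpe] at hmem; cases hmem
          · rw [hxcode_dx hxc]
        · exact Or.inl hmem'
      · right
        refine ⟨by rw [hdcon, h1]; simp, ?_⟩
        intro hrc
        rw [hdgetD, if_neg (by rintro rfl; rw [h1] at hcon'; cases hcon')]
        exact h2 hrc
    · -- heaps
      intro q hq hqc
      rw [hdcon] at hqc
      by_cases hqp : q = pc
      · subst hqp
        rw [hretNp, hdgetD, hbgetD]
        simp only [if_pos]
        refine ⟨?_, by simp [List.getD], by simp⟩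
        intro i hi0 hilen
        simp at hilen; omega
      · simp [hqp] at hqc
        obtain ⟨hh1, hh2, hh3⟩ := m.heaps q hq hqc
        rw [hretNq q hqp, hdgetD, hbgetD, if_neg hqp, if_neg hqp]
        exact ⟨hh1, hh2, hh3⟩
    · -- qbDist
      intro e he
      rcases List.mem_append.mp he with he' | he'
      · rw [hdget, if_neg (by
          rintro rfl
          rw [pv_contains_of_get? (m.qbDist e he')] at hcon'; cases hcon')]
        exact m.qbDist e he'
      · simp at he'; subst he'
        rw [hdget]; simp
    · -- qbSorted
      rw [List.pairwise_append]
      refine ⟨m.qbSorted, by simp, ?_⟩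
      intro a ha b hb
      simp at hb; subst hb
      exact m.qbHi a ha
    · -- qbLo
      intro e he
      rcases List.mem_append.mp he with he' | he'
      · exact m.qbLo e he'
      · simp at he'; subst he'; omega
    · -- qbHi
      intro e he
      rcases List.mem_append.mp he with he' | he'
      · exact m.qbHi e he'
      · simp at he'; subst he'; simp
    · -- valBound
      intro q v hv e he
      rw [hdget] at hv
      by_cases hqp : q = pc
      · rw [if_pos hqp] at hv
        injection hv with hv; subst hv
        rcases List.mem_append.mp he with he' | he'
        · have := m.qbLo e he'; omega
        · simp at he'; subst he'; simp
      · rw [if_neg hqp] at hv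
        rcases List.mem_append.mp he with he' | he'
        · exact m.valBound q v hv e he'
        · simp at he'; subst he'
          have := m.valBoundX q v hv; simp; omega
    · -- valBoundX
      intro q v hv
      rw [hdget] at hv
      by_cases hqp : q = pc
      · rw [if_pos hqp] at hv; injection hv with hv; omega
      · rw [if_neg hqp] at hv; exact m.valBoundX q v hv
    · -- edgeBest
      intro q hq
      rw [hbcon] at hq
      by_cases hqp : q = pc
      · subst hqp
        rw [hbgetD, if_pos rfl, hdcon, hdgetD, hdgetD, if_neg hxne, if_pos rfl]
        refine ⟨hp, by rw [pv_contains_of_get? m.xDist]; simp, ?_⟩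
        rw [PySem.Dict.getD_of_get?_eq_some _ 0 m.xDist]
      · simp [hqp] at hq
        obtain ⟨he1, he2, he3⟩ := m.edgeBest q hq
        have hbqne : best.getD q "" ≠ pc := by
          intro he; rw [he] at he2; rw [he2] at hcon'; cases hcon'
        rw [hbgetD, if_neg hqp, hdcon, hdgetD, hdgetD, if_neg hbqne, if_neg hqp]
        exact ⟨he1, by rw [he2]; simp, he3⟩
    · -- distCode
      rw [hdget, if_neg (by intro h; exact hpne h.symm)]
      exact m.distCode
    · -- distPos
      intro q hq hqc
      rw [hdcon] at hqc
      by_cases hqp : q = pc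
      · subst hqp; rw [hdgetD, if_pos rfl]; omega
      · simp [hqp] at hqc
        rw [hdgetD, if_neg hqp]
        exact m.distPos q hq hqc
    · -- closedX
      intro y hy
      rcases m.closedX y hy with hmem | hc
      · rcases List.mem_cons.mp hmem with rfl | hmem'
        · right; rw [hdcon]; simp
        · exact Or.inl hmem'
      · right; rw [hdcon, hc]; simp
    · -- closedK
      intro q hq
      rw [hdistk] at hq
      rcases List.mem_append.mp hq with hq' | hq'
      · rcases m.closedK q hq' with h | h | h
        · exact Or.inl h
        · right; left
          obtain ⟨e, he, hee⟩ := h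
          exact ⟨e, List.mem_append.mpr (Or.inl he), hee⟩
        · right; right
          intro y hy
          rw [hdcon, h y hy]; simp
      · simp at hq'; subst hq'
        right; left
        exact ⟨(q, dx + 1), List.mem_append.mpr (Or.inr (by simp)), rfl⟩
    · -- keysReach
      intro q hq
      rw [hdistk] at hq
      rcases List.mem_append.mp hq with hq' | hq'
      · exact m.keysReach q hq'
      · simp at hq'; subst hq'
        have hxk : x ∈ dist.keys := (PySem.Dict.contains_iff_mem_keys _ _).mp (pv_contains_of_get? m.xDist)
        exact hsat x (m.keysReach x hxk) q hp
    · -- xDist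
      rw [hdget, if_neg hxne]
      exact m.xDist

lemma pvFoldLemma {info : pvInfo} {code x : String} {dx : Int}
    (hsat : ∀ a ∈ pvReach info code, ∀ y ∈ pvIsaB info a, y ∈ pvReach info code) :
    ∀ (todo pend : List String) qA ret once qB dist best,
      (∀ p ∈ todo, p ∈ pvIsaB info x) →
      PvMid info code x dx pend todo qA ret once qB dist best →
      (pend = [] ∨ (pend = todo ∧ x = code)) →
      PvMid info code x dx [] []
        (List.foldl (pvStepA x dx) (qA, ret, once) todo).1
        (List.foldl (pvStepA x dx) (qA, ret, once) todo).2.1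
        (List.foldl (pvStepA x dx) (qA, ret, once) todo).2.2
        (List.foldl (pvStepB x dx) (qB, dist, best) todo).1
        (List.foldl (pvStepB x dx) (qB, dist, best) todo).2.1
        (List.foldl (pvStepB x dx) (qB, dist, best) todo).2.2 ∧
      pvMuA info (List.foldl (pvStepA x dx) (qA, ret, once) todo).1
        (List.foldl (pvStepA x dx) (qA, ret, once) todo).2.2 ≤ pvMuA info qA once ∧
      pvMuB info (List.foldl (pvStepB x dx) (qB, dist, best) todo).1
        (List.foldl (pvStepB x dx) (qB, dist, best) todo).2.1 ≤ pvMuB info qB dist := by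
  intro todo
  induction todo with
  | nil =>
    intro pend qA ret once qB dist best _ m hpend
    have hpe : pend = [] := by rcases hpend with h | ⟨h, _⟩ <;> exact h
    subst hpe
    exact ⟨m, le_refl _, le_refl _⟩
  | cons p rest ih =>
    intro pend qA ret once qB dist best htodo m hpend
    obtain ⟨pend', hpend', m', hmuA, hmuB⟩ :=
      pvStepLemma hsat (htodo p List.mem_cons_self) m hpend
    have hrest : ∀ q ∈ rest, q ∈ pvIsaB info x := fun q hq => htodo q (List.mem_cons.mpr (Or.inr hq))
    obtain ⟨mfin, hA, hB⟩ := ih pend' _ _ _ _ _ _ hrest m' hpend'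
    refine ⟨by simpa using mfin, ?_, ?_⟩
    · calc _ ≤ _ := by simpa using hA
        _ ≤ _ := hmuA
    · calc _ ≤ _ := by simpa using hB
        _ ≤ _ := hmuB

structure PvRel (info : pvInfo) (code : String)
    (qa : List (String × Int)) (ret : PySem.Dict String (List (Int × String)))
    (once : PySem.Set String) (qb : List (String × Int)) (dist : PySem.Dict String Int)
    (best : PySem.Dict String String) : Prop where
  shape : qa = qb ∨ ∃ l1 d l2, qb = l1 ++ l2 ∧ qa = l1 ++ (code, d) :: l2 ∧ 1 ≤ d ∧
    PySem.Set.contains once code = true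
  keysEq : ret.keys = dist.keys
  distKeys : dist.keys = code :: best.keys
  nodupK : dist.keys.Nodup
  onceEq : ∀ z, z ≠ code → PySem.Set.contains once z = dist.contains z
  isaCodeR : ∀ z ∈ pvIsaB info code, dist.contains z = true ∧ (z ≠ code → dist.getD z 0 = 1)
  heaps : ∀ z, z ≠ code → dist.contains z = true →
    PvHeap (ret.getD z []) ∧ (ret.getD z []).getD 0 (0, "") = (dist.getD z 0, best.getD z "") ∧
    ret.getD z [] ≠ []
  qbDist : ∀ e ∈ qb, dist.get? e.1 = some e.2
  qbSorted : List.Pairwise (fun a b : String × Int => a.2 ≤ b.2) qb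
  valBound : ∀ z v, dist.get? z = some v → ∀ e ∈ qb, v ≤ e.2 + 1
  edgeBest : ∀ z, best.contains z = true →
    z ∈ pvIsaB info (best.getD z "") ∧ dist.contains (best.getD z "") = true ∧
    dist.getD (best.getD z "") 0 + 1 = dist.getD z 0
  distCode : dist.get? code = some 0
  distPos : ∀ z, z ≠ code → dist.contains z = true → 1 ≤ dist.getD z 0
  closedKR : ∀ z ∈ dist.keys, (∃ e ∈ qb, e.1 = z) ∨ ∀ y ∈ pvIsaB info z, dist.contains y = true
  keysReach : ∀ z ∈ dist.keys, z ∈ pvReach info code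

lemma pvRelToMid {info : pvInfo} {code x : String} {dx : Int}
    {qa₁ qb₁ : List (String × Int)} {ret : PySem.Dict String (List (Int × String))}
    {once : PySem.Set String} {dist : PySem.Dict String Int} {best : PySem.Dict String String}
    (r : PvRel info code ((x, dx) :: qa₁) ret once ((x, dx) :: qb₁) dist best)
    (hshape : qa₁ = qb₁ ∨ ∃ l1 d l2, qb₁ = l1 ++ l2 ∧ qa₁ = l1 ++ (code, d) :: l2 ∧ 1 ≤ d ∧
      PySem.Set.contains once code = true) :
    PvMid info code x dx [] (pvIsaB info x) qa₁ ret once qb₁ dist best := by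
  have hxd : dist.get? x = some dx := r.qbDist (x, dx) List.mem_cons_self
  have htail : ∀ e ∈ qb₁, e ∈ (x, dx) :: qb₁ := fun e he => List.mem_cons.mpr (Or.inr he)
  refine { shape := hshape, keysEq := r.keysEq, distKeys := r.distKeys, nodupK := r.nodupK,
           onceEq := r.onceEq, isaCode := fun z hz => Or.inr (r.isaCodeR z hz),
           heaps := r.heaps, qbDist := fun e he => r.qbDist e (htail e he),
           qbSorted := (List.pairwise_cons.mp r.qbSorted).2,
           qbLo := fun e he => (List.pairwise_cons.mp r.qbSorted).1 e he,
           qbHi := fun e he => r.valBound e.1 e.2 (r.qbDist e (htail e he)) (x, dx)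
             List.mem_cons_self,
           valBound := fun z v hv e he => r.valBound z v hv e (htail e he),
           valBoundX := fun z v hv => r.valBound z v hv (x, dx) List.mem_cons_self,
           edgeBest := r.edgeBest, distCode := r.distCode, distPos := r.distPos,
           closedX := fun y hy => Or.inl hy, closedK := ?_, keysReach := r.keysReach,
           xDist := hxd }
  intro z hz
  rcases r.closedKR z hz with ⟨e, he, hez⟩ | h
  · rcases List.mem_cons.mp he with rfl | he'
    · exact Or.inl (by simpa using hez.symm)
    · exact Or.inr (Or.inl ⟨e, he', hez⟩)
  · exact Or.inr (Or.inr h)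

lemma pvMidToRel {info : pvInfo} {code x : String} {dx : Int}
    {qa qb : List (String × Int)} {ret : PySem.Dict String (List (Int × String))}
    {once : PySem.Set String} {dist : PySem.Dict String Int} {best : PySem.Dict String String}
    (m : PvMid info code x dx [] [] qa ret once qb dist best) :
    PvRel info code qa ret once qb dist best := by
  refine { shape := m.shape, keysEq := m.keysEq, distKeys := m.distKeys, nodupK := m.nodupK,
           onceEq := m.onceEq, isaCodeR := ?_, heaps := m.heaps, qbDist := m.qbDist,
           qbSorted := m.qbSorted, valBound := m.valBound, edgeBest := m.edgeBest,
           distCode := m.distCode, distPos := m.distPos, closedKR := ?_,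
           keysReach := m.keysReach }
  · intro z hz
    rcases m.isaCode z hz with h | h
    · cases h
    · exact h
  · intro z hz
    rcases m.closedK z hz with rfl | h | h
    · right
      intro y hy
      rcases m.closedX y hy with h | h
      · cases h
      · exact h
    · exact Or.inl h
    · exact Or.inr h

-- A's re-processing of the start node (the only queue asymmetry): every pushed pair is
-- dominated, so no heap head moves and nothing is enqueued
lemma pvExtraFold {info : pvInfo} {code : String} {d : Int}
    {dist : PySem.Dict String Int} {best : PySem.Dict String String}
    (hd : 1 ≤ d)
    (hisa : ∀ z ∈ pvIsaB info code, dist.contains z = true ∧ (z ≠ code → dist.getD z 0 = 1)) :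
    ∀ (ns : List String) (qA : List (String × Int)) (ret : PySem.Dict String (List (Int × String)))
      (once : PySem.Set String),
      (∀ p ∈ ns, p ∈ pvIsaB info code) →
      (∀ z, z ≠ code → PySem.Set.contains once z = dist.contains z) →
      PySem.Set.contains once code = true →
      ret.keys = dist.keys →
      (∀ z, z ≠ code → dist.contains z = true →
        PvHeap (ret.getD z []) ∧ (ret.getD z []).getD 0 (0, "") = (dist.getD z 0, best.getD z "") ∧
        ret.getD z [] ≠ []) →
      (List.foldl (pvStepA code d) (qA, ret, once) ns).1 = qA ∧
      (List.foldl (pvStepA code d) (qA, ret, once) ns).2.2 = once ∧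
      (List.foldl (pvStepA code d) (qA, ret, once) ns).2.1.keys = dist.keys ∧
      (∀ z, z ≠ code → dist.contains z = true →
        PvHeap ((List.foldl (pvStepA code d) (qA, ret, once) ns).2.1.getD z []) ∧
        ((List.foldl (pvStepA code d) (qA, ret, once) ns).2.1.getD z []).getD 0 (0, "") =
          (dist.getD z 0, best.getD z "") ∧
        (List.foldl (pvStepA code d) (qA, ret, once) ns).2.1.getD z [] ≠ []) := by
  intro ns
  induction ns with
  | nil =>
    intro qA ret once _ _ _ hkeys hheaps
    exact ⟨rfl, rfl, hkeys, hheaps⟩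
  | cons p rest ih =>
    intro qA ret once hns honce hoc hkeys hheaps
    have hpisa : p ∈ pvIsaB info code := hns p List.mem_cons_self
    have hpcon : dist.contains p = true := (hisa p hpisa).1
    have hretc : ret.contains p = true := by
      apply pv_bool_eq_of_iff (b := dist.contains p) ?_ ▸ hpcon
      rw [PySem.Dict.contains_iff_mem_keys, PySem.Dict.contains_iff_mem_keys, hkeys]
    have honcp : PySem.Set.contains once p = true := by
      by_cases hpc : p = code
      · rw [hpc]; exact hoc
      · rw [honce p hpc]; exact hpcon
    have hponce : p ∈ once := (PySem.Set.contains_iff _ _).mp honcp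
    set retN := ret.modify p [] (fun h => pvHeappush h (d + 1, code)) with hretN
    have hstep : pvStepA code d (qA, ret, once) p = (qA, retN, once) := by
      simp [pvStepA, hretc, hponce, ← hretN]
    have hkeysN : retN.keys = dist.keys := by
      rw [hretN, PySem.Dict.keys_modify, PySem.Dict.keys_insert_of_contains _ _ hretc, hkeys]
    have hheapsN : ∀ z, z ≠ code → dist.contains z = true →
        PvHeap (retN.getD z []) ∧ (retN.getD z []).getD 0 (0, "") = (dist.getD z 0, best.getD z "") ∧
        retN.getD z [] ≠ [] := by
      intro z hz hzc
      by_cases hzp : z = p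
      · subst hzp
        obtain ⟨hH, hHead, hNE⟩ := hheaps z hz hzc
        have hz1 : dist.getD z 0 = 1 := (hisa z hpisa).2 hz
        have hpush : retN.getD z [] = pvHeappush (ret.getD z []) (d + 1, code) := by
          rw [hretN, PySem.Dict.getD_modify_self]
        have hlt : pvLt (d + 1, code) ((ret.getD z []).getD 0 (0, "")) = false := by
          rw [hHead, hz1, pvLt_eq_false]
          constructor
          · simp; omega
          · intro h; simp at h; omega
        refine ⟨by rw [hpush]; exact pvHeappush_heap hH, ?_, ?_⟩
        · rw [hpush, pvHeappush_getD_zero hH hNE, hlt]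
          simp only [Bool.false_eq_true, if_false]
          exact hHead
        · rw [hpush]
          intro he
          have := pvHeappush_length (h := ret.getD z []) (it := (d + 1, code))
          rw [he] at this; simp at this
      · obtain ⟨hH, hHead, hNE⟩ := hheaps z hz hzc
        rw [hretN, PySem.Dict.getD_modify_of_ne _ _ _ hzp]
        exact ⟨hH, hHead, hNE⟩
    have := ih qA retN once (fun q hq => hns q (List.mem_cons.mpr (Or.inr hq))) honce hoc hkeysN hheapsN
    simpa [hstep] using this

lemma pvMuA_cons (info : pvInfo) (e : String × Int) (q : List (String × Int)) (once : PySem.Set String) :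
    pvMuA info (e :: q) once = pvMuA info q once + 1 := by
  simp [pvMuA]; omega

lemma pvMuB_cons (info : pvInfo) (e : String × Int) (q : List (String × Int)) (dist : PySem.Dict String Int) :
    pvMuB info (e :: q) dist = pvMuB info q dist + 1 := by
  simp [pvMuB]; omega

lemma pvBisim {info : pvInfo} {code : String}
    (hsat : ∀ a ∈ pvReach info code, ∀ y ∈ pvIsaB info a, y ∈ pvReach info code) :
    ∀ (n : Nat) (qa : List (String × Int)) (ret : PySem.Dict String (List (Int × String)))
      (once : PySem.Set String) (qb : List (String × Int)) (dist : PySem.Dict String Int)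
      (best : PySem.Dict String String) (fa fb : Nat),
      pvMuA info qa once ≤ fa → pvMuB info qb dist ≤ fb → pvMuA info qa once = n →
      PvRel info code qa ret once qb dist best →
      ∃ once', PvRel info code [] (pvABfs info "IS_A" fa qa ret once) once' []
        (pvBBfs info fb qb dist best).1 (pvBBfs info fb qb dist best).2 := by
  intro n
  induction n using Nat.strong_induction_on with
  | _ n ih =>
  intro qa ret once qb dist best fa fb hfa hfb hn r
  match qa, r with
  | [], r =>
    have hqb : qb = [] := by
      rcases r.shape with h | ⟨l1, d, l2, h1, h2, _, _⟩
      · exact h.symm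
      · exact absurd h2.symm (by simp)
    subst hqb
    have hA : pvABfs info "IS_A" fa [] ret once = ret := by cases fa <;> rfl
    have hB : pvBBfs info fb [] dist best = (dist, best) := by cases fb <;> rfl
    rw [hA, hB]
    exact ⟨once, r⟩
  | (x, dxv) :: qa₁, r =>
    have hfa1 : 1 ≤ pvMuA info ((x, dxv) :: qa₁) once := by rw [pvMuA_cons]; omega
    obtain ⟨fa', rfl⟩ : ∃ fa', fa = fa' + 1 := ⟨fa - 1, by omega⟩
    rcases r.shape with heq | ⟨l1, d, l2, h1, h2, h3, h4⟩
    · -- matched head, no pending extra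
      have hqb : qb = (x, dxv) :: qa₁ := heq.symm
      subst hqb
      have hfb1 : 1 ≤ pvMuB info ((x, dxv) :: qa₁) dist := by rw [pvMuB_cons]; omega
      obtain ⟨fb', rfl⟩ : ∃ fb', fb = fb' + 1 := ⟨fb - 1, by omega⟩
      have m := pvRelToMid r (Or.inl rfl)
      obtain ⟨mfin, hA, hB⟩ := pvFoldLemma hsat (pvIsaB info x) [] qa₁ ret once qa₁ dist best
        (fun _ hp => hp) m (Or.inl rfl)
      rw [pvABfs_cons, pvBBfs_cons]
      have hkey : pvInfoGetA info x "IS_A" = pvIsaB info x := rfl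
      rw [hkey]
      refine ih (pvMuA info (List.foldl (pvStepA x dxv) (qa₁, ret, once) (pvIsaB info x)).1
          (List.foldl (pvStepA x dxv) (qa₁, ret, once) (pvIsaB info x)).2.2) ?_ _ _ _ _ _ _ _ _
          ?_ ?_ rfl (pvMidToRel mfin)
      · rw [← hn, pvMuA_cons]; omega
      · rw [pvMuA_cons] at hfa; omega
      · rw [pvMuB_cons] at hfb
        calc _ ≤ pvMuB info qa₁ dist := hB
          _ ≤ fb' := by omega
    · -- an extra (code, d) is pending
      rcases l1 with _ | ⟨e, l1'⟩
      · -- the extra is at the head: A alone takes a dominated-push iteration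
        simp only [List.nil_append] at h1 h2
        injection h2 with h2a h2b
        injection h2a with hx hdx
        have h1' : qb = qa₁ := by rw [h1, ← h2b]
        subst h1'
        subst hx
        subst hdx
        rw [pvABfs_cons]
        have hkey : pvInfoGetA info x "IS_A" = pvIsaB info x := rfl
        rw [hkey]
        obtain ⟨hq1, hq2, hkeysN, hheapsN⟩ := pvExtraFold h3 r.isaCodeR
          (pvIsaB info x) qb ret once (fun _ hp => hp) r.onceEq h4 r.keysEq r.heaps
        have r' : PvRel info x qb
            (List.foldl (pvStepA x dxv) (qb, ret, once) (pvIsaB info x)).2.1 once qb dist best :=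
          { shape := Or.inl rfl, keysEq := hkeysN, distKeys := r.distKeys, nodupK := r.nodupK,
            onceEq := r.onceEq, isaCodeR := r.isaCodeR, heaps := hheapsN,
            qbDist := r.qbDist, qbSorted := r.qbSorted, valBound := r.valBound,
            edgeBest := r.edgeBest, distCode := r.distCode, distPos := r.distPos,
            closedKR := r.closedKR, keysReach := r.keysReach }
        have hstep : (fun s : List (String × Int) × PySem.Dict String (List (Int × String)) × PySem.Set String =>
            pvABfs info "IS_A" fa' s.1 s.2.1 s.2.2)
            (List.foldl (pvStepA x dxv) (qb, ret, once) (pvIsaB info x)) =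
            pvABfs info "IS_A" fa' qb
              (List.foldl (pvStepA x dxv) (qb, ret, once) (pvIsaB info x)).2.1 once := by
          show pvABfs info "IS_A" fa'
              (List.foldl (pvStepA x dxv) (qb, ret, once) (pvIsaB info x)).1
              (List.foldl (pvStepA x dxv) (qb, ret, once) (pvIsaB info x)).2.1
              (List.foldl (pvStepA x dxv) (qb, ret, once) (pvIsaB info x)).2.2 = _
          rw [hq1, hq2]
        rw [hstep]
        exact ih (pvMuA info qb once) (by rw [← hn, pvMuA_cons]; omega) _ _ _ _ _ _ _ _
          (by rw [pvMuA_cons] at hfa; omega) hfb rfl r'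
      · -- matched head in front of the extra
        injection h2 with h2a h2b
        subst h2a
        subst h1
        simp only [List.cons_append] at hfb ⊢
        have hfb1 : 1 ≤ pvMuB info ((x, dxv) :: (l1' ++ l2)) dist := by rw [pvMuB_cons]; omega
        obtain ⟨fb', rfl⟩ : ∃ fb', fb = fb' + 1 := ⟨fb - 1, by omega⟩
        have m := pvRelToMid r (Or.inr ⟨l1', d, l2, rfl, h2b, h3, h4⟩)
        obtain ⟨mfin, hA, hB⟩ := pvFoldLemma hsat (pvIsaB info x) [] qa₁ ret once (l1' ++ l2)
          dist best (fun _ hp => hp) m (Or.inl rfl)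
        rw [pvABfs_cons, pvBBfs_cons]
        have hkey : pvInfoGetA info x "IS_A" = pvIsaB info x := rfl
        rw [hkey]
        refine ih (pvMuA info (List.foldl (pvStepA x dxv) (qa₁, ret, once) (pvIsaB info x)).1
            (List.foldl (pvStepA x dxv) (qa₁, ret, once) (pvIsaB info x)).2.2) ?_ _ _ _ _ _ _ _ _
            ?_ ?_ rfl (pvMidToRel mfin)
        · rw [← hn, pvMuA_cons]; omega
        · rw [pvMuA_cons] at hfa; omega
        · rw [pvMuB_cons] at hfb
          calc _ ≤ pvMuB info (l1' ++ l2) dist := hB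
            _ ≤ fb' := by omega

def pvChildU (info : pvInfo) : List String :=
  info.flatMap (fun kv => PySem.Dict.getD (PySem.Dict.mk kv.2) "CHILD" [])

lemma pvChild_subset_U {info : pvInfo} {x y : String} (h : y ∈ pvInfoGetA info x "CHILD") :
    y ∈ pvChildU info := by
  revert h
  induction info with
  | nil =>
    intro h
    simp [pvInfoGetA, PySem.Dict.getD, PySem.Dict.get?] at h
  | cons kv rest ih =>
    intro h
    rw [pvInfoGetA, PySem.Dict.get?_mk_cons] at h
    by_cases hk : kv.1 == x
    · simp only [hk, if_pos] at h
      simp only [pvChildU, List.flatMap_cons, List.mem_append]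
      left; simpa using h
    · simp only [hk, Bool.false_eq_true, if_false] at h
      simp only [pvChildU, List.flatMap_cons, List.mem_append]
      right; exact ih (by rw [pvInfoGetA]; exact h)

def pvRevStep (ret : PySem.Dict String (List (Int × String)))
    (s : List String × PySem.Set String) (p : String) : List String × PySem.Set String :=
  if ret.contains p && !(PySem.Set.contains s.2 p) then (s.1 ++ [p], PySem.Set.add s.2 p)
  else s

lemma pvRevBfs_cons (info : pvInfo) (rkey : String) (ret : PySem.Dict String (List (Int × String)))
    (f : Nat) (ex : String) (qs : List String) (S : PySem.Set String) :
    pvRevBfs info rkey ret (f + 1) (ex :: qs) S =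
      pvRevBfs info rkey ret f
        (List.foldl (pvRevStep ret) (qs, S) (pvInfoGetA info ex rkey)).1
        (List.foldl (pvRevStep ret) (qs, S) (pvInfoGetA info ex rkey)).2 := rfl

lemma pvRevFold {info : pvInfo} {ret : PySem.Dict String (List (Int × String))} {ex : String} :
    ∀ (todo : List String) (q' : List String) (S' : PySem.Set String),
      (∀ p ∈ todo, p ∈ pvInfoGetA info ex "CHILD") →
      (∀ c ∈ q', c ∈ S') →
      (∀ c ∈ S', c ∈ q' ∨ (∀ p ∈ pvInfoGetA info c "CHILD", ret.contains p = true → p ∈ S') ∨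
        (c = ex ∧ ∀ p ∈ pvInfoGetA info ex "CHILD", p ∈ todo ∨
          (ret.contains p = true → p ∈ S'))) →
      (∀ c ∈ S', c ∈ (List.foldl (pvRevStep ret) (q', S') todo).2) ∧
      (∀ c ∈ (List.foldl (pvRevStep ret) (q', S') todo).1,
        c ∈ (List.foldl (pvRevStep ret) (q', S') todo).2) ∧
      (∀ c ∈ (List.foldl (pvRevStep ret) (q', S') todo).2,
        c ∈ (List.foldl (pvRevStep ret) (q', S') todo).1 ∨
        (∀ p ∈ pvInfoGetA info c "CHILD", ret.contains p = true →
          p ∈ (List.foldl (pvRevStep ret) (q', S') todo).2) ∨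
        (c = ex ∧ ∀ p ∈ pvInfoGetA info ex "CHILD",
          (ret.contains p = true →
            p ∈ (List.foldl (pvRevStep ret) (q', S') todo).2))) ∧
      ((List.foldl (pvRevStep ret) (q', S') todo).1.length +
        2 * ((pvChildU info).filter (fun y => !(PySem.Set.contains
          (List.foldl (pvRevStep ret) (q', S') todo).2 y))).length ≤
        q'.length + 2 * ((pvChildU info).filter (fun y => !(PySem.Set.contains S' y))).length) := by
  intro todo
  induction todo with
  | nil =>
    intro q' S' _ hq hinv
    refine ⟨fun c hc => hc, hq, ?_, le_refl _⟩
    intro c hc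
    rcases hinv c hc with h | h | ⟨rfl, h⟩
    · exact Or.inl h
    · exact Or.inr (Or.inl h)
    · refine Or.inr (Or.inr ⟨rfl, ?_⟩)
      intro p hp hrp
      rcases h p hp with hmem | h'
      · cases hmem
      · exact h' hrp
  | cons p rest ih =>
    intro q' S' htodo hq hinv
    have hpc : p ∈ pvInfoGetA info ex "CHILD" := htodo p List.mem_cons_self
    by_cases hcond : (ret.contains p && !(PySem.Set.contains S' p)) = true
    · -- enqueue p
      have hnp : PySem.Set.contains S' p = false := by
        cases hb : PySem.Set.contains S' p
        · rfl
        · exfalso; rw [hb] at hcond; simp at hcond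
      have hstep : pvRevStep ret (q', S') p = (q' ++ [p], PySem.Set.add S' p) := by
        simp only [pvRevStep, hcond, if_pos]
      have hq' : ∀ c ∈ q' ++ [p], c ∈ PySem.Set.add S' p := by
        intro c hc
        rcases List.mem_append.mp hc with h | h
        · exact (PySem.Set.mem_add _ _ _).mpr (Or.inl (hq c h))
        · simp at h; subst h; exact (PySem.Set.mem_add _ _ _).mpr (Or.inr rfl)
      have hinv' : ∀ c ∈ PySem.Set.add S' p, c ∈ q' ++ [p] ∨
          (∀ r ∈ pvInfoGetA info c "CHILD", ret.contains r = true → r ∈ PySem.Set.add S' p) ∨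
          (c = ex ∧ ∀ r ∈ pvInfoGetA info ex "CHILD", r ∈ rest ∨
            (ret.contains r = true → r ∈ PySem.Set.add S' p)) := by
        intro c hc
        rcases (PySem.Set.mem_add _ _ _).mp hc with hc' | rfl
        · rcases hinv c hc' with h | h | ⟨rfl, h⟩
          · exact Or.inl (List.mem_append.mpr (Or.inl h))
          · exact Or.inr (Or.inl (fun r hr hrr => (PySem.Set.mem_add _ _ _).mpr
              (Or.inl (h r hr hrr))))
          · refine Or.inr (Or.inr ⟨rfl, ?_⟩)
            intro r hr
            rcases h r hr with hmem | h'
            · rcases List.mem_cons.mp hmem with rfl | hmem'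
              · exact Or.inr (fun _ => (PySem.Set.mem_add _ _ _).mpr (Or.inr rfl))
              · exact Or.inl hmem'
            · exact Or.inr (fun hrr => (PySem.Set.mem_add _ _ _).mpr (Or.inl (h' hrr)))
        · exact Or.inl (List.mem_append.mpr (Or.inr (by simp)))
      obtain ⟨c1, c2, c3, c4⟩ := ih (q' ++ [p]) (PySem.Set.add S' p)
        (fun r hr => htodo r (List.mem_cons.mpr (Or.inr hr))) hq' hinv'
      rw [List.foldl_cons, hstep]
      refine ⟨fun c hc => c1 c ((PySem.Set.mem_add _ _ _).mpr (Or.inl hc)), c2, c3, ?_⟩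
      have hmu := pv_filter_add_lt (pvChild_subset_U hpc) hnp
      calc _ ≤ _ := c4
        _ ≤ _ := by simp only [List.length_append, List.length_cons, List.length_nil]; omega
    · -- skip p
      have hstep : pvRevStep ret (q', S') p = (q', S') := by
        simp only [pvRevStep, Bool.false_eq_true, hcond, if_false]
      have hinv' : ∀ c ∈ S', c ∈ q' ∨
          (∀ r ∈ pvInfoGetA info c "CHILD", ret.contains r = true → r ∈ S') ∨
          (c = ex ∧ ∀ r ∈ pvInfoGetA info ex "CHILD", r ∈ rest ∨
            (ret.contains r = true → r ∈ S')) := by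
        intro c hc
        rcases hinv c hc with h | h | ⟨rfl, h⟩
        · exact Or.inl h
        · exact Or.inr (Or.inl h)
        · refine Or.inr (Or.inr ⟨rfl, ?_⟩)
          intro r hr
          rcases h r hr with hmem | h'
          · rcases List.mem_cons.mp hmem with rfl | hmem'
            · right
              intro hrr
              have : PySem.Set.contains S' r = true := by
                cases hcs : PySem.Set.contains S' r
                · exfalso; apply hcond; rw [hrr, hcs]; rfl
                · rfl
              exact (PySem.Set.contains_iff _ _).mp this
            · exact Or.inl hmem'
          · exact Or.inr h'
      obtain ⟨c1, c2, c3, c4⟩ := ih q' S'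
        (fun r hr => htodo r (List.mem_cons.mpr (Or.inr hr))) hq hinv'
      rw [List.foldl_cons, hstep]
      exact ⟨c1, c2, c3, c4⟩

lemma pvRevBfs_closed {info : pvInfo} {ret : PySem.Dict String (List (Int × String))} :
    ∀ (f : Nat) (q : List String) (S : PySem.Set String),
      q.length + 2 * ((pvChildU info).filter (fun y => !(PySem.Set.contains S y))).length ≤ f →
      (∀ c ∈ q, c ∈ S) →
      (∀ c ∈ S, c ∈ q ∨ ∀ p ∈ pvInfoGetA info c "CHILD", ret.contains p = true → p ∈ S) →
      (∀ c ∈ S, c ∈ pvRevBfs info "CHILD" ret f q S) ∧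
      (∀ c ∈ pvRevBfs info "CHILD" ret f q S, ∀ p ∈ pvInfoGetA info c "CHILD",
        ret.contains p = true → p ∈ pvRevBfs info "CHILD" ret f q S) := by
  intro f
  induction f with
  | zero =>
    intro q S hmu hq hinv
    match q with
    | [] =>
      refine ⟨fun c hc => hc, fun c hc p hp hrp => ?_⟩
      rcases hinv c hc with h | h
      · cases h
      · exact h p hp hrp
    | _ :: _ => simp at hmu
  | succ f ih =>
    intro q S hmu hq hinv
    match q with
    | [] =>
      refine ⟨fun c hc => hc, fun c hc p hp hrp => ?_⟩
      rcases hinv c hc with h | h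
      · cases h
      · exact h p hp hrp
    | ex :: qs =>
      have hinv0 : ∀ c ∈ S, c ∈ qs ∨
          (∀ p ∈ pvInfoGetA info c "CHILD", ret.contains p = true → p ∈ S) ∨
          (c = ex ∧ ∀ p ∈ pvInfoGetA info ex "CHILD", p ∈ pvInfoGetA info ex "CHILD" ∨
            (ret.contains p = true → p ∈ S)) := by
        intro c hc
        rcases hinv c hc with h | h
        · rcases List.mem_cons.mp h with rfl | h'
          · exact Or.inr (Or.inr ⟨rfl, fun p hp => Or.inl hp⟩)
          · exact Or.inl h'
        · exact Or.inr (Or.inl h)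
      obtain ⟨c1, c2, c3, c4⟩ := pvRevFold (pvInfoGetA info ex "CHILD") qs S
        (fun _ hp => hp) (fun c hc => hq c (List.mem_cons.mpr (Or.inr hc))) hinv0
      rw [pvRevBfs_cons]
      have hrec := ih _ _ (by
          calc _ ≤ _ := c4
            _ ≤ f := by simp only [List.length_cons] at hmu; omega)
        c2 (by
          intro c hc
          rcases c3 c hc with h | h | ⟨rfl, h⟩
          · exact Or.inl h
          · exact Or.inr h
          · exact Or.inr h)
      refine ⟨fun c hc => hrec.1 _ (c1 c hc), hrec.2⟩

lemma pvSlice_get? {ret : PySem.Dict String (List (Int × String))} :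
    ∀ (S : List String) (acc : PySem.Dict String (List (Int × String))) (k : String)
      (v : List (Int × String)),
      ret.get? k = some v → (k ∈ S ∨ acc.get? k = some v) →
      (S.foldl (fun d k => match ret.get? k with | some v => d.insert k v | none => d) acc).get? k =
        some v := by
  intro S
  induction S with
  | nil =>
    intro acc k v hv hmem
    rcases hmem with h | h
    · cases h
    · exact h
  | cons a rest ih =>
    intro acc k v hv hmem
    rw [List.foldl_cons]
    by_cases hak : a = k
    · subst hak
      rw [hv]
      exact ih _ _ _ hv (by
        by_cases hkr : a ∈ rest
        · exact Or.inl hkr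
        · exact Or.inr (PySem.Dict.get?_insert_self _ _ _))
    · have hacc : (match ret.get? a with
          | some w => acc.insert a w | none => acc).get? k = acc.get? k := by
        cases hg : ret.get? a
        · rfl
        · exact PySem.Dict.get?_insert_of_ne _ _ (fun h => hak h.symm)
      refine ih _ _ _ hv ?_
      rcases hmem with h | h
      · rcases List.mem_cons.mp h with rfl | h'
        · exact absurd rfl hak
        · exact Or.inl h'
      · exact Or.inr (by rw [hacc]; exact h)

lemma pvRel_contains_eq {info : pvInfo} {code : String} {qa qb ret once dist best}
    (r : PvRel info code qa ret once qb dist best) (q : String) :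
    ret.contains q = dist.contains q := by
  apply pv_bool_eq_of_iff
  rw [PySem.Dict.contains_iff_mem_keys, PySem.Dict.contains_iff_mem_keys, r.keysEq]

lemma pvRel_best_contains {info : pvInfo} {code : String} {qa qb ret once dist best}
    (r : PvRel info code qa ret once qb dist best) (p : String) (hk : dist.contains p = true)
    (hne : p ≠ code) : best.contains p = true := by
  rw [PySem.Dict.contains_iff_mem_keys] at hk ⊢
  rw [r.distKeys] at hk
  rcases List.mem_cons.mp hk with h | h
  · exact absurd h hne
  · exact h

-- the two path-reconstruction loops walk the same predecessor chain in lockstep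
lemma pvPathEq {info : pvInfo} {code : String} {ret : PySem.Dict String (List (Int × String))}
    {once : PySem.Set String} {dist : PySem.Dict String Int} {best : PySem.Dict String String}
    {S : PySem.Set String}
    (r : PvRel info code [] ret once [] dist best)
    (hCons : ∀ x ∈ pvReach info code, ∀ y ∈ pvIsaB info x, x ∈ pvInfoGetA info y "CHILD")
    (hClosed : ∀ c ∈ S, ∀ p ∈ pvInfoGetA info c "CHILD", ret.contains p = true → p ∈ S) :
    ∀ (f : Nat) (p : String) (acc : List String), p ∈ S → dist.contains p = true →
      pvAPath code (pvSliceDict ret (some S)) f p acc = pvBPath code best f p acc := by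
  intro f
  induction f with
  | zero => intro p acc _ _; rfl
  | succ f ih =>
    intro p acc hpS hpc
    rw [pvAPath, pvBPath]
    by_cases hpcode : p = code
    · subst hpcode; simp
    · have hbeq : (p == code) = false := by simpa using hpcode
      rw [hbeq]
      simp only [Bool.false_eq_true, if_false]
      obtain ⟨L, hL⟩ := pv_get?_of_contains
        (show ret.contains p = true by rw [pvRel_contains_eq r]; exact hpc)
      have hsl : (pvSliceDict ret (some S)).get? p = some L := by
        rw [pvSliceDict]
        exact pvSlice_get? S _ p L hL (Or.inl hpS)
      have hslD : (pvSliceDict ret (some S)).getD p [] = L :=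
        PySem.Dict.getD_of_get?_eq_some _ [] hsl
      have hretD : ret.getD p [] = L := PySem.Dict.getD_of_get?_eq_some _ [] hL
      obtain ⟨_, hHead, _⟩ := r.heaps p hpcode hpc
      rw [hretD] at hHead
      have hnext : ((pvSliceDict ret (some S)).getD p []).getD 0 (0, "") =
          (dist.getD p 0, best.getD p "") := by rw [hslD, hHead]
      rw [hnext]
      have hbc : best.contains p = true := pvRel_best_contains r p hpc hpcode
      obtain ⟨hE1, hE2, _⟩ := r.edgeBest p hbc
      have hbp_reach : best.getD p "" ∈ pvReach info code := by
        apply r.keysReach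
        exact (PySem.Dict.contains_iff_mem_keys _ _).mp hE2
      have hbp_child : best.getD p "" ∈ pvInfoGetA info p "CHILD" := hCons _ hbp_reach p hE1
      have hbp_S : best.getD p "" ∈ S := by
        apply hClosed p hpS _ hbp_child
        rw [pvRel_contains_eq r]
        exact hE2
      exact ih _ _ hbp_S hE2

lemma pvSearchRel (info : pvInfo) (code : String) :
    ∃ once', PvRel info code [] (pvWideSearchBase code "IS_A" info) once' []
      (pvBBfs info (pvFuelB info) [(code, 0)] (PySem.Dict.mk [(code, 0)]) (PySem.Dict.mk [])).1
      (pvBBfs info (pvFuelB info) [(code, 0)] (PySem.Dict.mk [(code, 0)]) (PySem.Dict.mk [])).2 := by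
  have hsat : ∀ a ∈ pvReach info code, ∀ y ∈ pvIsaB info a, y ∈ pvReach info code :=
    fun a ha y hy => pv_reach_closed ha hy
  have hFA : pvFuelA info "IS_A" = (1 + 2 * (pvU info).length) + 1 := by rw [pvFuelA_isa]; omega
  have hFB : pvFuelB info = (1 + 2 * (pvU info).length) + 1 := by rw [pvFuelB_eq]; omega
  rw [pvWideSearchBase, hFA, hFB, pvABfs_cons, pvBBfs_cons]
  have hdistc : ∀ z v, (PySem.Dict.mk [(code, (0 : Int))]).get? z = some v → z = code ∧ v = 0 := by
    intro z v hv
    rw [PySem.Dict.get?_mk_cons] at hv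
    by_cases h : (code == z) = true
    · refine ⟨(beq_iff_eq.mp h).symm, ?_⟩
      rw [if_pos h] at hv; injection hv with hv; omega
    · rw [if_neg (by simpa using h)] at hv
      simp [PySem.Dict.get?] at hv
  have hcontf : ∀ z, z ≠ code → (PySem.Dict.mk [(code, (0 : Int))]).contains z = false := by
    intro z hz
    cases hc : (PySem.Dict.mk [(code, (0 : Int))]).contains z
    · rfl
    · obtain ⟨v, hv⟩ := pv_get?_of_contains hc
      exact absurd (hdistc z v hv).1 hz
  have m0 : PvMid info code code 0 (pvIsaB info code) (pvIsaB info code) [] (PySem.Dict.mk [(code, [])])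
      PySem.Set.empty [] (PySem.Dict.mk [(code, 0)]) (PySem.Dict.mk []) := by
    refine { shape := Or.inl rfl, keysEq := rfl, distKeys := rfl, nodupK := by simp,
             onceEq := ?_, isaCode := fun p hp => Or.inl hp, heaps := ?_,
             qbDist := fun e he => absurd he List.not_mem_nil,
             qbSorted := List.Pairwise.nil,
             qbLo := fun e he => absurd he List.not_mem_nil,
             qbHi := fun e he => absurd he List.not_mem_nil,
             valBound := fun z v _ e he => absurd he List.not_mem_nil,
             valBoundX := ?_, edgeBest := ?_, distCode := ?_, distPos := ?_,
             closedX := fun y hy => Or.inl hy, closedK := ?_, keysReach := ?_, xDist := ?_ }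
    · intro z hz
      rw [hcontf z hz]
      simp [PySem.Set.empty, PySem.Set.contains_eq_listContains]
    · intro z hz hzc
      rw [hcontf z hz] at hzc; cases hzc
    · intro z v hv
      have := (hdistc z v hv).2; omega
    · intro z hz
      simp [PySem.Dict.contains] at hz
    · rw [PySem.Dict.get?_mk_cons]; simp
    · intro z hz hzc
      rw [hcontf z hz] at hzc; cases hzc
    · intro z hz
      have : z = code := by simpa [PySem.Dict.keys, PySem.Dict.items] using hz
      exact Or.inl this
    · intro z hz
      have : z = code := by simpa [PySem.Dict.keys, PySem.Dict.items] using hz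
      rw [this]
      exact pv_code_mem_reach info code
    · rw [PySem.Dict.get?_mk_cons]; simp
  obtain ⟨mfin, hA, hB⟩ := pvFoldLemma hsat (pvIsaB info code) (pvIsaB info code) []
    (PySem.Dict.mk [(code, [])]) PySem.Set.empty [] (PySem.Dict.mk [(code, 0)]) (PySem.Dict.mk [])
    (fun _ hp => hp) m0 (Or.inr ⟨rfl, rfl⟩)
  have hkey : pvInfoGetA info code "IS_A" = pvIsaB info code := rfl
  rw [hkey]
  have hmuA0 : pvMuA info [] PySem.Set.empty ≤ 2 * (pvU info).length := by
    simp only [pvMuA, List.length_nil]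
    have := List.length_filter_le (fun y => !(PySem.Set.contains PySem.Set.empty y)) (pvU info)
    omega
  have hmuB0 : pvMuB info [] (PySem.Dict.mk [(code, 0)]) ≤ 2 * (pvU info).length := by
    simp only [pvMuB, List.length_nil]
    have := List.length_filter_le (fun y => !((PySem.Dict.mk [(code, (0:Int))]).contains y)) (pvU info)
    omega
  show ∃ once', PvRel info code []
    (pvABfs info "IS_A" (1 + 2 * (pvU info).length) _ _ _) once' [] _ _
  exact pvBisim hsat _ _ _ _ _ _ _ _ _ (le_trans hA (by omega)) (le_trans hB (by omega)) rfl
    (pvMidToRel mfin)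

-- ===== VERDICT (by name: the statement is the Claim_ definition above) =====
theorem get_shortest_path_to_root_spec : Claim_equal_get_shortest_path_to_root := by
  intro code root info _hdom hpre
  obtain ⟨_hinfoOK, hroot, hconsOr⟩ := hpre
  unfold Spec_get_shortest_path_to_root
  obtain ⟨once', rF⟩ := pvSearchRel info code
  have hclosedK : ∀ a, a ∈ (pvBBfs info (pvFuelB info) [(code, 0)] (PySem.Dict.mk [(code, 0)])
      (PySem.Dict.mk [])).1.keys → ∀ y ∈ pvIsaB info a,
      y ∈ (pvBBfs info (pvFuelB info) [(code, 0)] (PySem.Dict.mk [(code, 0)])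
        (PySem.Dict.mk [])).1.keys := by
    intro a ha y hy
    rcases rF.closedKR a ha with ⟨e, he, _⟩ | h
    · exact absurd he List.not_mem_nil
    · exact (PySem.Dict.contains_iff_mem_keys _ _).mp (h y hy)
  have hreachkeys : ∀ x ∈ pvReach info code,
      x ∈ (pvBBfs info (pvFuelB info) [(code, 0)] (PySem.Dict.mk [(code, 0)])
        (PySem.Dict.mk [])).1.keys := by
    rw [pvReach]
    refine pv_reach_min hclosedK ?_ _
    intro a ha
    have ha' : a = code := by simpa [PySem.Set.add, PySem.Set.empty] using ha
    rw [ha', rF.distKeys]; exact List.mem_cons_self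
  have hrootk : (pvBBfs info (pvFuelB info) [(code, 0)] (PySem.Dict.mk [(code, 0)])
      (PySem.Dict.mk [])).1.contains root = true :=
    (PySem.Dict.contains_iff_mem_keys _ _).mpr (hreachkeys root hroot)
  have hretrootc : (pvWideSearchBase code "IS_A" info).contains root = true := by
    rw [pvRel_contains_eq rF]; exact hrootk
  have hrk : pvGetReverseKey "IS_A" = "CHILD" := rfl
  have hWFT : pvWideFromTo code root "IS_A" info =
      pvSliceDict (pvWideSearchBase code "IS_A" info)
        (some (pvRevBfs info "CHILD" (pvWideSearchBase code "IS_A" info)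
          (pvFuelA info "CHILD") [root] (PySem.Set.add PySem.Set.empty root))) := by
    rw [pvWideFromTo]
    simp only [hretrootc, Bool.not_true, Bool.false_eq_true, if_false, hrk]
  obtain ⟨hS1, hS2⟩ := pvRevBfs_closed (info := info)
    (ret := pvWideSearchBase code "IS_A" info) (pvFuelA info "CHILD") [root]
    (PySem.Set.add PySem.Set.empty root)
    (by
      have := List.length_filter_le (fun y => !(PySem.Set.contains
        (PySem.Set.add PySem.Set.empty root) y)) (pvChildU info)
      have hF : pvFuelA info "CHILD" = 2 + 2 * (pvChildU info).length := rfl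
      simp only [List.length_cons, List.length_nil, hF]
      omega)
    (by intro c hc; simp at hc; subst hc; simp [PySem.Set.add, PySem.Set.empty])
    (by
      intro c hc
      have : c = root := by simpa [PySem.Set.add, PySem.Set.empty] using hc
      exact Or.inl (by simp [this]))
  have hrootS : root ∈ pvRevBfs info "CHILD" (pvWideSearchBase code "IS_A" info)
      (pvFuelA info "CHILD") [root] (PySem.Set.add PySem.Set.empty root) :=
    hS1 root (by simp [PySem.Set.add, PySem.Set.empty])
  show pvAPath code (pvWideFromTo code root "IS_A" info) (info.length + 2) root [] =
    pvBPath code (pvBBfs info (pvFuelB info) [(code, 0)] (PySem.Dict.mk [(code, 0)])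
      (PySem.Dict.mk [])).2 (info.length + 2) root []
  rw [hWFT]
  have hcodecase : root = code →
      pvAPath code (pvSliceDict (pvWideSearchBase code "IS_A" info)
        (some (pvRevBfs info "CHILD" (pvWideSearchBase code "IS_A" info)
          (pvFuelA info "CHILD") [root] (PySem.Set.add PySem.Set.empty root))))
        (info.length + 2) root [] =
      pvBPath code (pvBBfs info (pvFuelB info) [(code, 0)] (PySem.Dict.mk [(code, 0)])
        (PySem.Dict.mk [])).2 (info.length + 2) root [] := by
    intro hrc
    rw [hrc]
    obtain ⟨k, hk⟩ : ∃ k, info.length + 2 = k + 1 := ⟨info.length + 1, by omega⟩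
    rw [hk, pvAPath, pvBPath]
    simp
  rcases hconsOr with hrc | hmem | hcons
  · exact hcodecase hrc
  · -- root is a direct IS_A parent of code: its stored predecessor is necessarily code
    by_cases hrceq : root = code
    · exact hcodecase hrceq
    · obtain ⟨hrc1, hrc2⟩ := rF.isaCodeR root hmem
      have hdist1 : (pvBBfs info (pvFuelB info) [(code, 0)] (PySem.Dict.mk [(code, 0)])
          (PySem.Dict.mk [])).1.getD root 0 = 1 := hrc2 hrceq
      have hbc := pvRel_best_contains rF root hrc1 hrceq
      obtain ⟨hE1, hE2, hE3⟩ := rF.edgeBest root hbc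
      have hbp : (pvBBfs info (pvFuelB info) [(code, 0)] (PySem.Dict.mk [(code, 0)])
          (PySem.Dict.mk [])).2.getD root "" = code := by
        by_contra hne
        have := rF.distPos _ hne hE2
        omega
      obtain ⟨L, hL⟩ := pv_get?_of_contains
        (show (pvWideSearchBase code "IS_A" info).contains root = true from hretrootc)
      have hsl : (pvSliceDict (pvWideSearchBase code "IS_A" info)
          (some (pvRevBfs info "CHILD" (pvWideSearchBase code "IS_A" info)
            (pvFuelA info "CHILD") [root] (PySem.Set.add PySem.Set.empty root)))).getD root [] =
          L := by
        rw [pvSliceDict]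
        exact PySem.Dict.getD_of_get?_eq_some _ [] (pvSlice_get? _ _ root L hL (Or.inl hrootS))
      have hretD : (pvWideSearchBase code "IS_A" info).getD root [] = L :=
        PySem.Dict.getD_of_get?_eq_some _ [] hL
      obtain ⟨_, hHead, _⟩ := rF.heaps root hrceq hrc1
      rw [hretD] at hHead
      obtain ⟨k, hk⟩ : ∃ k, info.length + 2 = k + 1 + 1 := ⟨info.length, by omega⟩
      rw [hk, pvAPath, pvBPath]
      have hbeq : (root == code) = false := by simpa using hrceq
      rw [hbeq]
      simp only [Bool.false_eq_true, if_false]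
      rw [hsl, hHead, hbp, pvAPath, pvBPath]
      simp
  · exact pvPathEq rF hcons hS2 _ root [] hrootS hrootk
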